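-- pv_equiv track=rewrite | github.com/kimdy003/Python_study | 2_Programmers/level_3/45_모두 0으로 만들기/모두 0으로 만들기_2.py | solution
-- ===== SOURCE A (Python) =====
-- from collections import defaultdict
--
-- def solution(a, edges):
--     answer = 0
--     if sum(a) != 0:
--         return -1
--     graph = defaultdict(list)
--
--     for u, v in edges:
--         graph[u].append(v)
--         graph[v].append(u)
--
--     while len(graph) > 1:
--         for node in graph:
--             if len(graph[node]) == 1:
--                 graph[graph[node][0]].remove(node)
--                 a[graph[node][0]] += a[node]
--                 answer += abs(a[node])
--                 a[node] = 0
--                 del graph[node]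
--                 break
--
--     if sum(a) == 0:
--         return answer
--     return -1
-- ===== SOURCE B (Python) =====
-- def solution(a, edges):
--     # Single-pass leaf queue with degree/neighbour-sum arrays instead of
--     # repeated full scans over a dict-of-lists graph.
--     # Note: A also mutates its argument list `a` in place; B does not.
--     if sum(a) != 0:
--         return -1
--     n = len(a)
--     deg = [0] * n
--     nsum = [0] * n
--     for u, v in edges:
--         deg[u] += 1
--         deg[v] += 1
--         nsum[u] += v
--         nsum[v] += u
--     val = list(a)
--     queue = [v for v in range(n) if deg[v] == 1]
--     answer = 0
--     head = 0
--     while head < len(queue):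
--         v = queue[head]
--         head += 1
--         if deg[v] != 1:
--             continue
--         p = nsum[v]
--         answer += abs(val[v])
--         val[p] += val[v]
--         nsum[p] -= v
--         deg[p] -= 1
--         deg[v] = 0
--         if deg[p] == 1:
--             queue.append(p)
--     return answer
-- ===== Notes on version B (the rewrite author's own statement) =====
-- stated objective: alternative
-- what changed: A repeatedly rescans the whole dict-of-lists graph to find and delete one leaf per pass (paying another scan for list.remove); B builds integer degree and neighbour-sum arrays once and processes a growing leaf worklist in a single pass, finding each leaf's parent arithmetically.
-- outside the precondition, e.g. on solution([1, 0, -1], [[1, 0]]): A returns 0, B returns 1; on solution([1, -1], [[0, -1]]): A returns 1, B returns 1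
import Mathlib
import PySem

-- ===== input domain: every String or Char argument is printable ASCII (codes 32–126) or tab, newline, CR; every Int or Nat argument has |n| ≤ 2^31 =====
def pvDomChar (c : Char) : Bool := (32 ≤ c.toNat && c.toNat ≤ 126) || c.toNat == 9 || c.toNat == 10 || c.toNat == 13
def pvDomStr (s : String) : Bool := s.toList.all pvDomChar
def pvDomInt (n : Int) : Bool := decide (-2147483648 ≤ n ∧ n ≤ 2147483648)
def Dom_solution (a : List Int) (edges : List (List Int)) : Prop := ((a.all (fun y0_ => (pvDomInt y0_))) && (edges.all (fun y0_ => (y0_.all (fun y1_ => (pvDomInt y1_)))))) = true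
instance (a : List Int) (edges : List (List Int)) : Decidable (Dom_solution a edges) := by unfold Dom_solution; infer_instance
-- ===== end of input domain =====

-- B replaces A's repeated full scans over a dict-of-lists graph by a single-pass leaf
-- worklist over degree / neighbour-sum arrays.  NOTE: A mutates its argument list `a` in
-- place; B does not — the equivalence proved here is about the RETURN value.

-- ===== PORT A =====
-- the 'while len(graph) > 1: for node in graph: …' loop of A; the Nat argument is fuel
-- (Python's while has none; under Pre_ the fuel is never exhausted).
def pvALoop : Nat → PySem.Dict Int (List Int) → List Int → Int → List Int × Int
  | 0, _, a, ans => (a, ans)                      -- fuel exhausted: Python would loop on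
  | fuel+1, g, a, ans =>
    if 1 < g.size then
      -- 'for node in graph: if len(graph[node]) == 1: … break' = first key whose list has length 1
      match g.items.find? (fun kv => kv.2.length == 1) with
      | none => (a, ans)                          -- no leaf: Python loops forever (outside Pre_)
      | some (node, l) =>
        let p := PySem.List.pyGetD l 0 0          -- graph[node][0]  (l has length 1)
        match PySem.List.remove? (g.getD p []) node with
        | none => (a, ans)                        -- ValueError: unreachable under Pre_
        | some lp =>
          let g1 := g.insert p lp                                         -- graph[…].remove(node)
          let a1 := PySem.List.pySetD a p (PySem.List.pyGetD a p 0 + PySem.List.pyGetD a node 0)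
                                                                          -- a[graph[node][0]] += a[node]
          let ans1 := ans + |PySem.List.pyGetD a1 node 0|                 -- answer += abs(a[node])
          let a2 := PySem.List.pySetD a1 node 0                           -- a[node] = 0
          pvALoop fuel (g1.erase node) a2 ans1                            -- del graph[node]
    else (a, ans)

-- body of A's graph-building loop: graph[u].append(v); graph[v].append(u)  (defaultdict)
def pvABuild (g : PySem.Dict Int (List Int)) (e : List Int) : PySem.Dict Int (List Int) :=
  match e with
  | [u, v] =>
    let g1 := g.insert u ((g.getD u []) ++ [v])
    g1.insert v ((g1.getD v []) ++ [u])
  | _ => g                                        -- unpacking error: unreachable under Pre_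

def solution (a : List Int) (edges : List (List Int)) : Int :=
  if a.sum ≠ 0 then -1
  else
    -- graph = defaultdict(list); for u, v in edges: graph[u].append(v); graph[v].append(u)
    let graph : PySem.Dict Int (List Int) := edges.foldl pvABuild PySem.Dict.empty
    let r := pvALoop (edges.length + 1) graph a 0
    if r.1.sum = 0 then r.2 else -1

-- ===== PORT B =====
-- the 'while head < len(queue)' loop of Source B; the Nat argument is fuel (never exhausted under Pre_).
def pvBLoop : Nat → List Int → List Int → List Int → List Int → Nat → Int → Int
  | 0, _, _, _, _, _, ans => ans
  | fuel+1, deg, nsum, val, queue, head, ans =>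
    if head < queue.length then
      let v := queue.getD head 0
      if PySem.List.pyGetD deg v 0 ≠ 1 then
        pvBLoop fuel deg nsum val queue (head+1) ans
      else
        let p := PySem.List.pyGetD nsum v 0
        let ans1 := ans + |PySem.List.pyGetD val v 0|
        let val1 := PySem.List.pySetD val p (PySem.List.pyGetD val p 0 + PySem.List.pyGetD val v 0)
        let nsum1 := PySem.List.pySetD nsum p (PySem.List.pyGetD nsum p 0 - v)
        let deg1 := PySem.List.pySetD deg p (PySem.List.pyGetD deg p 0 - 1)
        let deg2 := PySem.List.pySetD deg1 v 0
        let queue1 := if PySem.List.pyGetD deg2 p 0 = 1 then queue ++ [p] else queue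
        pvBLoop fuel deg2 nsum1 val1 queue1 (head+1) ans1
    else ans

-- body of Source B's array-building loop: deg[u]+=1; deg[v]+=1; nsum[u]+=v; nsum[v]+=u
def pvBStep (dn : List Int × List Int) (e : List Int) : List Int × List Int :=
  match e with
  | [u, v] =>
    let deg := PySem.List.pySetD dn.1 u (PySem.List.pyGetD dn.1 u 0 + 1)
    let deg := PySem.List.pySetD deg v (PySem.List.pyGetD deg v 0 + 1)
    let nsum := PySem.List.pySetD dn.2 u (PySem.List.pyGetD dn.2 u 0 + v)
    let nsum := PySem.List.pySetD nsum v (PySem.List.pyGetD nsum v 0 + u)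
    (deg, nsum)
  | _ => dn                                       -- unpacking error: unreachable under Pre_

def solution_alt (a : List Int) (edges : List (List Int)) : Int :=
  if a.sum ≠ 0 then -1
  else
    let n := a.length
    let dn := edges.foldl pvBStep (List.replicate n 0, List.replicate n 0)
    let queue := (PySem.List.pyRange 0 n 1).filter (fun v => PySem.List.pyGetD dn.1 v 0 == 1)
    pvBLoop (n + edges.length + 1) dn.1 dn.2 a queue 0 0

-- ===== PRECONDITION & SPEC =====
-- edge list as ordered pairs (Pre_ guarantees every edge is a 2-element list)
def pvEdges (edges : List (List Int)) : List (Int × Int) :=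
  edges.map (fun e => (e.getD 0 0, e.getD 1 0))
-- the vertex set of an edge list
def pvV (E : List (Int × Int)) : Finset Int :=
  E.foldr (fun e s => insert e.1 (insert e.2 s)) ∅
-- sum of the values sitting on the vertices of E
def pvVsum (E : List (Int × Int)) (a : List Int) : Int :=
  (pvV E).sum (fun x => a.getD x.toNat 0)
-- one breadth step of reachability, and its iteration (for a decidable connectivity test)
def pvGrow (E : List (Int × Int)) (S : Finset Int) : Finset Int :=
  E.foldr (fun e s => if e.1 ∈ s ∨ e.2 ∈ s then insert e.1 (insert e.2 s) else s) S
def pvReach (E : List (Int × Int)) : Nat → Finset Int → Finset Int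
  | 0, S => S
  | n+1, S => pvGrow E (pvReach E n S)
abbrev pvConnB (E : List (Int × Int)) : Prop :=
  ∀ x ∈ pvV E, x ∈ pvReach E (E.length + 1) {(E.headD (0, 0)).1}
abbrev pvEdgeOK (n : Int) (e : List Int) : Prop :=
  e.length = 2 ∧ 0 ≤ e.getD 0 0 ∧ e.getD 0 0 < n ∧ 0 ≤ e.getD 1 0 ∧ e.getD 1 0 < n ∧
    e.getD 0 0 ≠ e.getD 1 0

-- Pre_ keeps the inputs on which A's value is the one being claimed: excluded are edge lists that
-- are not a single tree (A raises or loops forever there), node labels outside 0..len(a)-1 (A's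
-- negative-index wraparound aliases list cells there, or raises), and trees whose own value sum is
-- nonzero although sum(a) = 0 — there the answer depends on the accidental order (dict insertion
-- vs ascending label) in which the two implementations pick the final leaves, so neither value is
-- specified.
def Pre_solution (a : List Int) (edges : List (List Int)) : Prop :=
  a.sum ≠ 0 ∨
  (a.sum = 0 ∧ edges = []) ∨
  (a.sum = 0 ∧ (∀ e ∈ edges, pvEdgeOK (a.length : Int) e) ∧
    pvConnB (pvEdges edges) ∧
    (pvV (pvEdges edges)).card = edges.length + 1 ∧
    pvVsum (pvEdges edges) a = 0)

instance (a : List Int) (edges : List (List Int)) : Decidable (Pre_solution a edges) := by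
  unfold Pre_solution; infer_instance

def pvWitness_solution : List Int × List (List Int) := ([1, -1], [[0, 1]])

def Spec_solution (a : List Int) (edges : List (List Int)) (out : Int) : Prop := out = solution_alt a edges
instance (a : List Int) (edges : List (List Int)) (out : Int) : Decidable (Spec_solution a edges out) := by unfold Spec_solution; infer_instance

-- ===== CLAIM (what is proved, stated in full; the proofs are below) =====
def Claim_equal_solution : Prop := ∀ (a : List Int) (edges : List (List Int)), Dom_solution a edges → Pre_solution a edges → Spec_solution a edges (solution a edges)

-- ===== LEMMAS AND PROOFS =====

-- neighbour multiset of x (as a list; one entry per incident edge)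
def pvNbrs (E : List (Int × Int)) (x : Int) : List Int :=
  E.flatMap (fun e => if e.1 = x then [e.2] else if e.2 = x then [e.1] else [])
def pvDeg (E : List (Int × Int)) (x : Int) : Nat := (pvNbrs E x).length
-- abstract indexed access on Int-labelled cells (labels are in [0, len) under Pre_)
def getI (a : List Int) (x : Int) : Int := a.getD x.toNat 0
def setI (a : List Int) (x w : Int) : List Int := a.set x.toNat w
def pvInc (v : Int) (e : Int × Int) : Bool := e.1 == v || e.2 == v
def pvPrune (E : List (Int × Int)) (v : Int) : List (Int × Int) := E.filter (fun e => !(pvInc v e))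
def pvNbr (E : List (Int × Int)) (v : Int) : Int := (pvNbrs E v).headD 0
def pvNodesL (E : List (Int × Int)) : List Int := E.flatMap (fun e => [e.1, e.2])
def pvFindLeaf (E : List (Int × Int)) : Option Int :=
  (pvNodesL E).find? (fun x => pvDeg E x == 1)

-- walks and trees
inductive pvWalk (E : List (Int × Int)) : Int → Int → Prop
  | nil : ∀ x, pvWalk E x x
  | cons : ∀ {x z y}, ((x, z) ∈ E ∨ (z, x) ∈ E) → pvWalk E z y → pvWalk E x y

def pvConn (E : List (Int × Int)) : Prop := ∀ x ∈ pvV E, ∀ y ∈ pvV E, pvWalk E x y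
def pvTree (E : List (Int × Int)) : Prop :=
  (∀ e ∈ E, e.1 ≠ e.2) ∧ pvConn E ∧ (pvV E).card = E.length + 1

-- basic facts
lemma pvV_nil : pvV ([] : List (Int × Int)) = ∅ := rfl
lemma pvV_cons (e : Int × Int) (E : List (Int × Int)) :
    pvV (e :: E) = insert e.1 (insert e.2 (pvV E)) := rfl
lemma mem_pvV {E : List (Int × Int)} {x : Int} :
    x ∈ pvV E ↔ ∃ e ∈ E, e.1 = x ∨ e.2 = x := by
  induction E with
  | nil => simp [pvV_nil]
  | cons e E ih =>
    simp only [pvV_cons, Finset.mem_insert, ih, List.mem_cons]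
    constructor
    · rintro (h | h | ⟨f, hf, hor⟩)
      · exact ⟨e, Or.inl rfl, Or.inl h.symm⟩
      · exact ⟨e, Or.inl rfl, Or.inr h.symm⟩
      · exact ⟨f, Or.inr hf, hor⟩
    · rintro ⟨f, hf | hf, hor⟩
      · subst hf; rcases hor with h | h
        · exact Or.inl h.symm
        · exact Or.inr (Or.inl h.symm)
      · exact Or.inr (Or.inr ⟨f, hf, hor⟩)

lemma pvNbrs_nil (x : Int) : pvNbrs [] x = [] := rfl
lemma pvNbrs_cons (e : Int × Int) (E : List (Int × Int)) (x : Int) :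
    pvNbrs (e :: E) x
      = (if e.1 = x then [e.2] else if e.2 = x then [e.1] else []) ++ pvNbrs E x := rfl
lemma pvNbrs_append (E F : List (Int × Int)) (x : Int) :
    pvNbrs (E ++ F) x = pvNbrs E x ++ pvNbrs F x := by
  simp [pvNbrs]

lemma adj_mem_pvNbrs {E : List (Int × Int)} {x z : Int} (hxz : x ≠ z)
    (h : (x, z) ∈ E ∨ (z, x) ∈ E) : x ∈ pvNbrs E z := by
  induction E with
  | nil => simp at h
  | cons e E ih =>
    rw [pvNbrs_cons, List.mem_append]
    rcases h with h | h
    · rcases List.mem_cons.1 h with h | h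
      · left; subst h; simp [hxz]
      · right; exact ih (Or.inl h)
    · rcases List.mem_cons.1 h with h | h
      · left; subst h; simp
      · right; exact ih (Or.inr h)

lemma mem_pvV_of_adj {E : List (Int × Int)} {x z : Int}
    (h : (x, z) ∈ E ∨ (z, x) ∈ E) : x ∈ pvV E ∧ z ∈ pvV E := by
  rcases h with h | h
  · exact ⟨mem_pvV.2 ⟨_, h, Or.inl rfl⟩, mem_pvV.2 ⟨_, h, Or.inr rfl⟩⟩
  · exact ⟨mem_pvV.2 ⟨_, h, Or.inr rfl⟩, mem_pvV.2 ⟨_, h, Or.inl rfl⟩⟩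

lemma pvDeg_pos_iff {E : List (Int × Int)} {x : Int} :
    0 < pvDeg E x ↔ x ∈ pvV E := by
  unfold pvDeg
  induction E with
  | nil => simp [pvNbrs_nil, pvV_nil]
  | cons e E ih =>
    rw [pvNbrs_cons, pvV_cons]
    simp only [List.length_append, Finset.mem_insert]
    constructor
    · intro h
      by_cases h1 : e.1 = x
      · exact Or.inl h1.symm
      by_cases h2 : e.2 = x
      · exact Or.inr (Or.inl h2.symm)
      · simp [h1, h2] at h; exact Or.inr (Or.inr (ih.1 h))
    · rintro (h | h | h)
      · simp [h]
      · subst h; split_ifs <;> simp_all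
      · have := ih.2 h; omega

lemma pvNbrs_eq_nil_of_not_mem {E : List (Int × Int)} {x : Int} (h : x ∉ pvV E) :
    pvNbrs E x = [] := by
  have : ¬ 0 < pvDeg E x := fun hc => h (pvDeg_pos_iff.1 hc)
  unfold pvDeg at this
  simpa using List.length_eq_zero_iff.1 (by omega)

lemma mem_pvNodesL {E : List (Int × Int)} {x : Int} :
    x ∈ pvNodesL E ↔ x ∈ pvV E := by
  rw [mem_pvV]; unfold pvNodesL
  simp only [List.mem_flatMap, List.mem_cons, List.not_mem_nil, or_false]
  constructor
  · rintro ⟨e, he, h | h⟩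
    · exact ⟨e, he, Or.inl h.symm⟩
    · exact ⟨e, he, Or.inr h.symm⟩
  · rintro ⟨e, he, h | h⟩
    · exact ⟨e, he, Or.inl h.symm⟩
    · exact ⟨e, he, Or.inr h.symm⟩
-- handshake and leaf existence
lemma pvDeg_cons {e : Int × Int} (hne : e.1 ≠ e.2) (E : List (Int × Int)) (x : Int) :
    pvDeg (e :: E) x
      = ((if x = e.1 then 1 else 0) + (if x = e.2 then 1 else 0)) + pvDeg E x := by
  unfold pvDeg
  rw [pvNbrs_cons, List.length_append]
  by_cases h1 : e.1 = x
  · have h2' : ¬ x = e.2 := fun hh => hne (h1.trans (hh ▸ rfl))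
    have h2 : ¬ e.2 = x := fun hh => h2' hh.symm
    simp only [h1, if_neg h2']
    simp
  · have h1' : ¬ x = e.1 := fun hh => h1 hh.symm
    by_cases h2 : e.2 = x
    · simp only [h2, if_neg h1, if_neg h1']
      simp
    · have h2' : ¬ x = e.2 := fun hh => h2 hh.symm
      simp only [if_neg h1, if_neg h2, if_neg h1', if_neg h2']
      simp

lemma sum_pvDeg {E : List (Int × Int)} {S : Finset Int}
    (hs : ∀ e ∈ E, e.1 ≠ e.2) (hsub : pvV E ⊆ S) :
    ∑ x ∈ S, pvDeg E x = 2 * E.length := by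
  induction E with
  | nil => simp [pvDeg, pvNbrs_nil]
  | cons e E ih =>
    have hsub' : pvV E ⊆ S := by
      intro y hy; exact hsub (by rw [pvV_cons]; exact Finset.mem_insert_of_mem (Finset.mem_insert_of_mem hy))
    have h1 : e.1 ∈ S := hsub (by rw [pvV_cons]; exact Finset.mem_insert_self _ _)
    have h2 : e.2 ∈ S := hsub (by rw [pvV_cons]; exact Finset.mem_insert_of_mem (Finset.mem_insert_self _ _))
    have hrec := ih (fun f hf => hs f (List.mem_cons_of_mem _ hf)) hsub'
    have hne := hs e (List.mem_cons_self ..)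
    calc ∑ x ∈ S, pvDeg (e :: E) x
        = ∑ x ∈ S, (((if x = e.1 then 1 else 0) + (if x = e.2 then 1 else 0)) + pvDeg E x) := by
          apply Finset.sum_congr rfl; intro x _; rw [pvDeg_cons hne]
      _ = (∑ x ∈ S, (if x = e.1 then 1 else 0)) + (∑ x ∈ S, (if x = e.2 then 1 else 0))
            + ∑ x ∈ S, pvDeg E x := by rw [Finset.sum_add_distrib, Finset.sum_add_distrib]
      _ = 2 * (e :: E).length := by
          rw [Finset.sum_ite_eq' S e.1 (fun _ => 1), Finset.sum_ite_eq' S e.2 (fun _ => 1)]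
          simp [h1, h2, hrec]; omega

lemma exists_leaf {E : List (Int × Int)} (hT : pvTree E) (hne : E ≠ []) :
    ∃ v, pvDeg E v = 1 := by
  by_contra hc
  push Not at hc
  have hge : ∀ x ∈ pvV E, 2 ≤ pvDeg E x := by
    intro x hx
    have h1 : 0 < pvDeg E x := pvDeg_pos_iff.2 hx
    have := hc x
    omega
  have hsum := sum_pvDeg hT.1 (le_refl (pvV E))
  have hcard : (pvV E).card * 2 ≤ ∑ x ∈ pvV E, pvDeg E x := by
    calc (pvV E).card * 2 = ∑ _x ∈ pvV E, 2 := by rw [Finset.sum_const, smul_eq_mul, mul_comm]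
    _ ≤ _ := Finset.sum_le_sum hge
  rw [hsum, hT.2.2] at hcard
  have : 0 < E.length := List.length_pos_iff.2 hne
  omega

-- walks
lemma pvWalk_trans {E : List (Int × Int)} {x y z : Int}
    (h1 : pvWalk E x y) (h2 : pvWalk E y z) : pvWalk E x z := by
  induction h1 with
  | nil => exact h2
  | cons hadj _ ih => exact pvWalk.cons hadj (ih h2)

lemma pvWalk_symm {E : List (Int × Int)} {x y : Int} (h : pvWalk E x y) :
    pvWalk E y x := by
  induction h with
  | nil => exact pvWalk.nil _
  | cons hadj _ ih =>
    refine pvWalk_trans ih (pvWalk.cons ?_ (pvWalk.nil _))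
    exact hadj.symm

lemma pvGrow_sound_aux {E : List (Int × Int)} {r : Int} :
    ∀ (F : List (Int × Int)) (S : Finset Int), (∀ e ∈ F, e ∈ E) →
    (∀ z ∈ S, pvWalk E r z) →
    ∀ z ∈ F.foldr (fun e s => if e.1 ∈ s ∨ e.2 ∈ s then insert e.1 (insert e.2 s) else s) S,
      pvWalk E r z := by
  intro F
  induction F with
  | nil => intro S _ hS z hz; exact hS z hz
  | cons e F ih =>
    intro S hF hS z hz
    simp only [List.foldr_cons] at hz
    set acc := F.foldr (fun e s => if e.1 ∈ s ∨ e.2 ∈ s then insert e.1 (insert e.2 s) else s) S with hacc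
    have hw : ∀ z ∈ acc, pvWalk E r z := ih S (fun f hf => hF f (List.mem_cons_of_mem _ hf)) hS
    have heE : e ∈ E := hF e (List.mem_cons_self ..)
    by_cases hcond : e.1 ∈ acc ∨ e.2 ∈ acc
    · rw [if_pos hcond] at hz
      have hw1 : pvWalk E r e.1 := by
        rcases hcond with h | h
        · exact hw _ h
        · exact pvWalk_trans (hw _ h) (pvWalk.cons (Or.inr heE) (pvWalk.nil _))
      have hw2 : pvWalk E r e.2 := by
        rcases hcond with h | h
        · exact pvWalk_trans (hw _ h) (pvWalk.cons (Or.inl heE) (pvWalk.nil _))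
        · exact hw _ h
      rcases Finset.mem_insert.1 hz with hz | hz
      · exact hz ▸ hw1
      rcases Finset.mem_insert.1 hz with hz | hz
      · exact hz ▸ hw2
      · exact hw _ hz
    · rw [if_neg hcond] at hz
      exact hw _ hz

lemma pvReach_sound {E : List (Int × Int)} {r : Int} (n : Nat) :
    ∀ z ∈ pvReach E n {r}, pvWalk E r z := by
  induction n with
  | zero =>
    intro z hz
    simp only [pvReach, Finset.mem_singleton] at hz
    exact hz ▸ pvWalk.nil _
  | succ n ih =>
    intro z hz
    exact pvGrow_sound_aux E (pvReach E n {r}) (fun _ h => h) ih z hz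

lemma pvConnB_to_conn {E : List (Int × Int)} (h : pvConnB E) : pvConn E := by
  intro x hx y hy
  have hwx := pvReach_sound _ x (h x hx)
  have hwy := pvReach_sound _ y (h y hy)
  exact pvWalk_trans (pvWalk_symm hwx) hwy
-- prune lemmas
lemma pvInc_false_iff {v : Int} {e : Int × Int} :
    pvInc v e = false ↔ (e.1 ≠ v ∧ e.2 ≠ v) := by
  unfold pvInc; simp

lemma mem_prune_sub {E : List (Int × Int)} {v : Int} {e : Int × Int}
    (h : e ∈ pvPrune E v) : e ∈ E := (List.mem_filter.1 h).1

lemma mem_pvV_prune {E : List (Int × Int)} {v x : Int} (h : x ∈ pvV (pvPrune E v)) :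
    x ∈ pvV E := by
  rcases mem_pvV.1 h with ⟨e, he, hor⟩
  exact mem_pvV.2 ⟨e, mem_prune_sub he, hor⟩

lemma pvNbrs_filter_keep {E : List (Int × Int)} {x : Int} {q : Int × Int → Bool}
    (h : ∀ e ∈ E, pvInc x e = true → q e = true) :
    pvNbrs (E.filter q) x = pvNbrs E x := by
  induction E with
  | nil => simp
  | cons e E ih =>
    have ih' := ih (fun f hf => h f (List.mem_cons_of_mem _ hf))
    by_cases hq : q e = true
    · rw [List.filter_cons_of_pos hq, pvNbrs_cons, pvNbrs_cons, ih']
    · have hinc : pvInc x e = false := by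
        by_contra hc
        exact hq (h e (List.mem_cons_self ..) (by revert hc; cases pvInc x e <;> simp))
      rw [List.filter_cons_of_neg hq, pvNbrs_cons, ih']
      rcases pvInc_false_iff.1 hinc with ⟨h1, h2⟩
      rw [if_neg h1, if_neg h2, List.nil_append]

lemma nbrs_prune_self (E : List (Int × Int)) (v : Int) :
    pvNbrs (pvPrune E v) v = [] := by
  induction E with
  | nil => simp [pvPrune, pvNbrs_nil]
  | cons e E ih =>
    unfold pvPrune at *
    by_cases hq : pvInc v e = true
    · rw [List.filter_cons_of_neg (by simp [hq])]; exact ih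
    · rw [List.filter_cons_of_pos (by simp [hq]), pvNbrs_cons, ih]
      have hinc : pvInc v e = false := by revert hq; cases pvInc v e <;> simp
      rcases pvInc_false_iff.1 hinc with ⟨h1, h2⟩
      rw [if_neg h1, if_neg h2, List.nil_append]

lemma deg_prune_self (E : List (Int × Int)) (v : Int) :
    pvDeg (pvPrune E v) v = 0 := by
  unfold pvDeg; rw [nbrs_prune_self]; rfl

lemma nbrs_deg_one {E : List (Int × Int)} {v : Int} (h : pvDeg E v = 1) :
    pvNbrs E v = [pvNbr E v] := by
  unfold pvDeg at h
  unfold pvNbr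
  rcases List.length_eq_one_iff.1 h with ⟨x, hx⟩
  rw [hx]; rfl

lemma filter_inc_length (E : List (Int × Int)) (v : Int) :
    (E.filter (pvInc v)).length = pvDeg E v := by
  unfold pvDeg
  induction E with
  | nil => simp [pvNbrs_nil]
  | cons e E ih =>
    rw [pvNbrs_cons, List.length_append]
    by_cases hq : pvInc v e = true
    · rw [List.filter_cons_of_pos hq, List.length_cons, ih]
      have : (if e.1 = v then [e.2] else if e.2 = v then [e.1] else []).length = 1 := by
        unfold pvInc at hq
        rcases Bool.or_eq_true_iff.1 hq with h | h <;> simp at h <;> simp [h]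
        by_cases h1 : e.1 = v <;> simp [h1]
      omega
    · have hinc : pvInc v e = false := by revert hq; cases pvInc v e <;> simp
      rw [List.filter_cons_of_neg hq, ih]
      rcases pvInc_false_iff.1 hinc with ⟨h1, h2⟩
      rw [if_neg h1, if_neg h2]
      simp
lemma pvNbrs_perm {E F : List (Int × Int)} (h : E.Perm F) (x : Int) :
    (pvNbrs E x).Perm (pvNbrs F x) := List.Perm.flatMap_right _ h

lemma prune_perm {E : List (Int × Int)} (v : Int) :
    E.Perm (E.filter (pvInc v) ++ pvPrune E v) :=
  (List.filter_append_perm (pvInc v) E).symm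

lemma exists_e0 {E : List (Int × Int)} {v : Int} (h : pvDeg E v = 1) :
    ∃ e0, E.filter (pvInc v) = [e0] := by
  have := filter_inc_length E v
  rw [h] at this
  exact List.length_eq_one_iff.1 this

lemma e0_spec {E : List (Int × Int)} {v : Int} (hs : ∀ e ∈ E, e.1 ≠ e.2)
    (h : pvDeg E v = 1) {e0 : Int × Int} (he0 : E.filter (pvInc v) = [e0]) :
    e0 = (v, pvNbr E v) ∨ e0 = (pvNbr E v, v) := by
  have hperm : (pvNbrs E v).Perm (pvNbrs ([e0] ++ pvPrune E v) v) := by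
    have := pvNbrs_perm (prune_perm (E := E) v) v
    rwa [he0] at this
  rw [pvNbrs_append, nbrs_prune_self, List.append_nil, nbrs_deg_one h] at hperm
  have hsing : pvNbrs [e0] v = [pvNbr E v] := by
    have hlen := hperm.length_eq
    rcases List.length_eq_one_iff.1 hlen.symm with ⟨w, hw⟩
    rw [hw] at hperm ⊢
    have := List.Perm.mem_iff hperm (a := pvNbr E v)
    simp at this
    rw [this]
  have he0mem : e0 ∈ E ∧ pvInc v e0 = true := by
    have : e0 ∈ E.filter (pvInc v) := by rw [he0]; exact List.mem_cons_self ..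
    exact ⟨(List.mem_filter.1 this).1, (List.mem_filter.1 this).2⟩
  have hne := hs e0 he0mem.1
  rw [pvNbrs_cons, pvNbrs_nil, List.append_nil] at hsing
  obtain ⟨s, t⟩ := e0
  simp only at hsing hne he0mem ⊢
  by_cases h1 : s = v
  · subst h1
    rw [if_pos rfl] at hsing
    simp at hsing
    left; rw [hsing]
  · have h2 : t = v := by
      unfold pvInc at he0mem
      rcases Bool.or_eq_true_iff.1 he0mem.2 with h | h <;> simp at h
      · exact absurd h h1
      · exact h
    subst h2
    rw [if_neg h1, if_pos rfl] at hsing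
    simp at hsing
    right; rw [hsing]

lemma pvNbr_adj {E : List (Int × Int)} {v : Int} (hs : ∀ e ∈ E, e.1 ≠ e.2)
    (h : pvDeg E v = 1) :
    ((v, pvNbr E v) ∈ E ∨ (pvNbr E v, v) ∈ E) ∧ pvNbr E v ≠ v := by
  rcases exists_e0 h with ⟨e0, he0⟩
  have hmem : e0 ∈ E := by
    have : e0 ∈ E.filter (pvInc v) := by rw [he0]; exact List.mem_cons_self ..
    exact (List.mem_filter.1 this).1
  have hne := hs e0 hmem
  rcases e0_spec hs h he0 with h1 | h1
  · rw [h1] at hmem hne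
    simp only at hne
    exact ⟨Or.inl hmem, fun hc => hne hc.symm⟩
  · rw [h1] at hmem hne
    simp only at hne
    exact ⟨Or.inr hmem, fun hc => hne hc⟩

lemma nbrs_perm_prune {E : List (Int × Int)} {v : Int} (hs : ∀ e ∈ E, e.1 ≠ e.2)
    (h : pvDeg E v = 1) :
    (pvNbrs E (pvNbr E v)).Perm (v :: pvNbrs (pvPrune E v) (pvNbr E v)) := by
  rcases exists_e0 h with ⟨e0, he0⟩
  have hperm := pvNbrs_perm (prune_perm (E := E) v) (pvNbr E v)
  rw [he0, pvNbrs_append] at hperm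
  have hp_ne : pvNbr E v ≠ v := (pvNbr_adj hs h).2
  have hsing : pvNbrs [e0] (pvNbr E v) = [v] := by
    rcases e0_spec hs h he0 with h1 | h1 <;> subst h1 <;>
      rw [pvNbrs_cons, pvNbrs_nil, List.append_nil]
    · rw [if_neg (fun hc => hp_ne hc.symm), if_pos rfl]
    · rw [if_pos rfl]
  rw [hsing] at hperm
  exact hperm

lemma deg_prune_nbr {E : List (Int × Int)} {v : Int} (hs : ∀ e ∈ E, e.1 ≠ e.2)
    (h : pvDeg E v = 1) :
    pvDeg E (pvNbr E v) = pvDeg (pvPrune E v) (pvNbr E v) + 1 := by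
  have := (nbrs_perm_prune hs h).length_eq
  unfold pvDeg
  rw [this]; simp

lemma nbrs_prune_other {E : List (Int × Int)} {v x : Int} (hs : ∀ e ∈ E, e.1 ≠ e.2)
    (h : pvDeg E v = 1) (hx : x ≠ v) (hxp : x ≠ pvNbr E v) :
    pvNbrs (pvPrune E v) x = pvNbrs E x := by
  rcases exists_e0 h with ⟨e0, he0⟩
  apply pvNbrs_filter_keep
  intro e he hincx
  by_cases hq : pvInc v e = true
  · exfalso
    have : e ∈ E.filter (pvInc v) := List.mem_filter.2 ⟨he, hq⟩
    rw [he0] at this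
    simp at this
    rcases e0_spec hs h he0 with h1 | h1 <;> rw [this, h1] at hincx
    · unfold pvInc at hincx; simp at hincx
      rcases hincx with hh | hh
      · exact hx hh.symm
      · exact hxp hh.symm
    · unfold pvInc at hincx; simp at hincx
      rcases hincx with hh | hh
      · exact hxp hh.symm
      · exact hx hh.symm
  · simp only [Bool.not_eq_true] at hq
    simp [hq]
lemma pvPrune_length_lt {E : List (Int × Int)} {v : Int} (h : 0 < pvDeg E v) :
    (pvPrune E v).length < E.length := by
  have hl := (prune_perm (E := E) v).length_eq
  rw [List.length_append, filter_inc_length] at hl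
  omega

-- the order-independent cost: repeatedly prune the first leaf (in endpoint order)
def pvC (E : List (Int × Int)) (a : List Int) : Int :=
  match h : pvFindLeaf E with
  | none => 0
  | some v =>
    |getI a v| + pvC (pvPrune E v) (setI a (pvNbr E v) (getI a (pvNbr E v) + getI a v))
termination_by E.length
decreasing_by
  exact pvPrune_length_lt (by
    have := List.find?_some h
    simp only [beq_iff_eq] at this
    omega)

lemma pvC_nil (a : List Int) : pvC [] a = 0 := by
  unfold pvC pvFindLeaf pvNodesL
  rfl
lemma adjacent_leaves {E : List (Int × Int)} {v : Int} (hT : pvTree E)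
    (hv : pvDeg E v = 1) (hm : pvDeg E (pvNbr E v) = 1) : E.length = 1 := by
  set p := pvNbr E v with hp
  have hadj := pvNbr_adj hT.1 hv
  have hboth := mem_pvV_of_adj hadj.1
  have hvV : v ∈ pvV E := hboth.1
  have hpV : p ∈ pvV E := hboth.2
  have hnbrv : pvNbrs E v = [p] := nbrs_deg_one hv
  have hnbrp : pvNbrs E p = [v] := by
    have h1 := nbrs_deg_one hm
    have hvmem : v ∈ pvNbrs E p := adj_mem_pvNbrs hadj.2.symm (hadj.1.imp id id)
    rw [h1] at hvmem
    simp at hvmem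
    rw [h1, ← hvmem]
  have hwalk : ∀ x y : Int, pvWalk E x y → (y = v ∨ y = p) → (x = v ∨ x = p) := by
    intro x y hw
    induction hw with
    | nil => exact id
    | cons hadj' hw' ih =>
      rename_i x' z' y'
      intro hy
      rcases ih hy with hz | hz
      · by_cases hxv : x' = v
        · exact Or.inl hxv
        · subst hz
          have hx := adj_mem_pvNbrs hxv hadj'
          rw [hnbrv] at hx; simp at hx; exact Or.inr hx
      · by_cases hxp : x' = p
        · exact Or.inr hxp
        · subst hz
          have hx := adj_mem_pvNbrs hxp hadj'
          rw [hnbrp] at hx; simp at hx; exact Or.inl hx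
  have hsub : pvV E ⊆ {v, p} := by
    intro x hx
    have hw := hT.2.1 x hx v hvV
    rcases hwalk x v hw (Or.inl rfl) with h | h <;> simp [h]
  have hcard : (pvV E).card ≤ 2 :=
    (Finset.card_le_card hsub).trans ((Finset.card_insert_le _ _).trans (by simp))
  have hne : E ≠ [] := by
    rcases hadj.1 with h | h <;> exact List.ne_nil_of_mem h
  have hlen : 0 < E.length := List.length_pos_iff.2 hne
  have := hT.2.2
  omega

lemma walk_prune {E : List (Int × Int)} {v : Int} (hv : pvDeg E v = 1)
    {x y : Int} (hw : pvWalk E x y) (hy : y ≠ v) :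
    (x ≠ v → pvWalk (pvPrune E v) x y) ∧ (x = v → pvWalk (pvPrune E v) (pvNbr E v) y) := by
  induction hw with
  | nil =>
    exact ⟨fun _ => pvWalk.nil _, fun hx => absurd hx hy⟩
  | cons hadj hw' ih =>
    rename_i x' z' y'
    constructor
    · intro hx
      by_cases hz : z' = v
      · rw [hz] at hadj
        have hx'p := adj_mem_pvNbrs hx hadj
        rw [nbrs_deg_one hv] at hx'p
        simp at hx'p
        rw [hx'p]
        exact (ih hy).2 hz
      · refine pvWalk.cons ?_ ((ih hy).1 hz)
        have hmem : ∀ e : Int × Int, e ∈ E → (e = (x', z') ∨ e = (z', x')) → e ∈ pvPrune E v := by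
          intro e he hee
          apply List.mem_filter.2
          refine ⟨he, ?_⟩
          have hf : pvInc v e = false := by
            apply pvInc_false_iff.2
            rcases hee with rfl | rfl
            · exact ⟨fun hc => hx (by simpa using hc), fun hc => hz (by simpa using hc)⟩
            · exact ⟨fun hc => hz (by simpa using hc), fun hc => hx (by simpa using hc)⟩
          simp [hf]
        rcases hadj with h | h
        · exact Or.inl (hmem _ h (Or.inl rfl))
        · exact Or.inr (hmem _ h (Or.inr rfl))
    · intro hx
      rw [hx] at hadj
      by_cases hzv : z' = v
      · exact (ih hy).2 hzv
      · have hz : z' = pvNbr E v := by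
          have hmem : z' ∈ pvNbrs E v := adj_mem_pvNbrs hzv hadj.symm
          rw [nbrs_deg_one hv] at hmem
          simpa using hmem
        exact hz ▸ ((ih hy).1 hzv)
lemma V_prune {E : List (Int × Int)} {v : Int} (hT : pvTree E)
    (hv : pvDeg E v = 1) (h2 : 2 ≤ E.length) :
    pvV (pvPrune E v) = (pvV E).erase v := by
  apply Finset.ext
  intro x
  rw [Finset.mem_erase]
  constructor
  · intro hx
    refine ⟨?_, mem_pvV_prune hx⟩
    intro hc
    subst hc
    have := pvDeg_pos_iff.2 hx
    rw [deg_prune_self] at this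
    omega
  · rintro ⟨hxv, hxV⟩
    by_cases hxp : x = pvNbr E v
    · subst hxp
      have hdegp : 0 < pvDeg (pvPrune E v) (pvNbr E v) := by
        have hrec := deg_prune_nbr hT.1 hv
        by_cases h1 : pvDeg E (pvNbr E v) = 1
        · have := adjacent_leaves hT hv h1
          omega
        · have : 0 < pvDeg E (pvNbr E v) := pvDeg_pos_iff.2 hxV
          omega
      exact pvDeg_pos_iff.1 hdegp
    · have : 0 < pvDeg (pvPrune E v) x := by
        have := pvDeg_pos_iff.2 hxV
        unfold pvDeg at *
        rw [nbrs_prune_other hT.1 hv hxv hxp]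
        omega
      exact pvDeg_pos_iff.1 this

lemma tree_prune {E : List (Int × Int)} {v : Int} (hT : pvTree E)
    (hv : pvDeg E v = 1) (h2 : 2 ≤ E.length) : pvTree (pvPrune E v) := by
  refine ⟨fun e he => hT.1 e (mem_prune_sub he), ?_, ?_⟩
  · intro x hx y hy
    rw [V_prune hT hv h2, Finset.mem_erase] at hx hy
    have hw := hT.2.1 x hx.2 y hy.2
    exact (walk_prune hv hw hy.1).1 hx.1
  · rw [V_prune hT hv h2]
    have hvV : v ∈ pvV E := pvDeg_pos_iff.1 (by omega)
    rw [Finset.card_erase_of_mem hvV, hT.2.2]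
    have hl := (prune_perm (E := E) v).length_eq
    rw [List.length_append, filter_inc_length, hv] at hl
    omega

-- value-cell lemmas
lemma length_setI (a : List Int) (x w : Int) : (setI a x w).length = a.length := by
  unfold setI; simp

lemma getI_setI_self {a : List Int} {x : Int} (h0 : 0 ≤ x) (hl : x < (a.length : Int)) (w : Int) :
    getI (setI a x w) x = w := by
  unfold getI setI
  have hx : x.toNat < a.length := by omega
  simp [List.getD_eq_getElem?_getD, hx]

lemma getI_setI_ne {a : List Int} {x y : Int} (h0 : 0 ≤ x) (h0' : 0 ≤ y) (hne : x ≠ y) (w : Int) :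
    getI (setI a x w) y = getI a y := by
  unfold getI setI
  rw [List.getD_eq_getElem?_getD, List.getElem?_set_ne, ← List.getD_eq_getElem?_getD]
  intro hc
  exact hne (by omega)

lemma sum_setI {a : List Int} {x : Int} (h0 : 0 ≤ x) (hl : x < (a.length : Int)) (w : Int) :
    (setI a x w).sum = a.sum - getI a x + w := by
  unfold setI getI
  have hx : x.toNat < a.length := by omega
  induction a generalizing x with
  | nil => simp at hx
  | cons b a ih =>
    by_cases hz : x.toNat = 0
    · rw [hz]
      simp [List.getD]
      omega
    · have hx' : x.toNat = (x - 1).toNat + 1 := by omega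
      rw [hx']
      simp only [List.set_cons_succ, List.sum_cons, List.getD_cons_succ]
      have := ih (x := x - 1) (by omega) (by simp at hl ⊢; omega) (by simp at hx; omega)
      rw [this]
      omega
lemma pvC_eq_some {E : List (Int × Int)} {a : List Int} {v : Int}
    (h : pvFindLeaf E = some v) :
    pvC E a = |getI a v| + pvC (pvPrune E v) (setI a (pvNbr E v) (getI a (pvNbr E v) + getI a v)) := by
  rw [pvC]
  split
  · rename_i heq; rw [heq] at h; cases h
  · rename_i v' heq; rw [heq] at h; cases h; rfl

lemma pvFindLeaf_isSome {E : List (Int × Int)} {v : Int} (h : pvDeg E v = 1) :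
    ∃ m, pvFindLeaf E = some m ∧ pvDeg E m = 1 := by
  have hv : v ∈ pvNodesL E := mem_pvNodesL.2 (pvDeg_pos_iff.1 (by omega))
  have : (pvFindLeaf E).isSome := by
    unfold pvFindLeaf
    rw [List.find?_isSome]
    exact ⟨v, hv, by simp [h]⟩
  obtain ⟨m, hm⟩ := Option.isSome_iff_exists.1 this
  refine ⟨m, hm, ?_⟩
  have := List.find?_some hm
  simpa using this

lemma prune_length_of_leaf {E : List (Int × Int)} {v : Int} (h : pvDeg E v = 1) :
    (pvPrune E v).length + 1 = E.length := by
  have hl := (prune_perm (E := E) v).length_eq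
  rw [List.length_append, filter_inc_length, h] at hl
  omega

lemma setI_comm {a : List Int} {x y : Int} (h0 : 0 ≤ x) (h0' : 0 ≤ y) (hne : x ≠ y)
    (w1 w2 : Int) : setI (setI a x w1) y w2 = setI (setI a y w2) x w1 := by
  unfold setI
  rw [List.set_comm]
  omega

lemma setI_setI (a : List Int) (x : Int) (w1 w2 : Int) :
    setI (setI a x w1) x w2 = setI a x w2 := by
  unfold setI
  rw [List.set_set]

lemma pvNbr_congr {E E' : List (Int × Int)} {x : Int} (h : pvNbrs E' x = pvNbrs E x) :
    pvNbr E' x = pvNbr E x := by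
  unfold pvNbr; rw [h]

lemma pvPrune_comm (E : List (Int × Int)) (v w : Int) :
    pvPrune (pvPrune E v) w = pvPrune (pvPrune E w) v := by
  unfold pvPrune
  rw [List.filter_filter, List.filter_filter]
  apply List.filter_congr
  intro e _
  rw [Bool.and_comm]

lemma vsum_nil (a : List Int) : pvVsum [] a = 0 := rfl

lemma vsum_single {e : Int × Int} (hne : e.1 ≠ e.2) (a : List Int) :
    pvVsum [e] a = getI a e.1 + getI a e.2 := by
  unfold pvVsum getI
  show (insert e.1 (insert e.2 ∅) : Finset Int).sum _ = _
  rw [Finset.sum_insert (by simp [hne])]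
  simp

lemma vsum_prune {E : List (Int × Int)} {v : Int} {a : List Int} (hT : pvTree E)
    (hv : pvDeg E v = 1) (h2 : 2 ≤ E.length)
    (hr : ∀ x ∈ pvV E, 0 ≤ x ∧ x < (a.length : Int)) :
    pvVsum (pvPrune E v) (setI a (pvNbr E v) (getI a (pvNbr E v) + getI a v)) = pvVsum E a := by
  set p := pvNbr E v with hp
  have hadj := pvNbr_adj hT.1 hv
  have hboth := mem_pvV_of_adj hadj.1
  have hvV : v ∈ pvV E := hboth.1
  have hpV : p ∈ pvV E := hboth.2
  have hpv : p ≠ v := hadj.2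
  have hVp := V_prune hT hv h2
  have hpV' : p ∈ (pvV E).erase v := Finset.mem_erase.2 ⟨hpv, hpV⟩
  have hr0 : ∀ x ∈ pvV E, getI (setI a p (getI a p + getI a v)) x = if x = p then getI a p + getI a v else getI a x := by
    intro x hx
    by_cases hxp : x = p
    · rw [if_pos hxp, hxp, getI_setI_self (hr p hpV).1 (hr p hpV).2]
    · rw [if_neg hxp, getI_setI_ne (hr p hpV).1 (hr x hx).1 (fun hc => hxp hc.symm)]
  unfold pvVsum
  rw [hVp]
  have getI_eq : ∀ (b : List Int) (x : Int), b.getD x.toNat 0 = getI b x := fun _ _ => rfl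
  simp only [getI_eq]
  have step1 : ∀ x ∈ (pvV E).erase v,
      getI (setI a p (getI a p + getI a v)) x
        = (if x = p then getI a p + getI a v else getI a x) := by
    intro x hx
    exact hr0 x (Finset.mem_of_mem_erase hx)
  rw [Finset.sum_congr rfl step1, ← Finset.sum_erase_add _ _ hpV']
  have h3 : ∑ x ∈ ((pvV E).erase v).erase p, (if x = p then getI a p + getI a v else getI a x)
      = ∑ x ∈ ((pvV E).erase v).erase p, getI a x :=
    Finset.sum_congr rfl (fun x hx => if_neg (Finset.ne_of_mem_erase hx))
  rw [h3, if_pos rfl]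
  have hs1 : (∑ x ∈ (pvV E).erase v, getI a x) + getI a v = ∑ x ∈ pvV E, getI a x :=
    Finset.sum_erase_add _ _ hvV
  have hs2 : (∑ x ∈ ((pvV E).erase v).erase p, getI a x) + getI a p = ∑ x ∈ (pvV E).erase v, getI a x :=
    Finset.sum_erase_add _ _ hpV'
  linarith
lemma pvC_exchange : ∀ (n : Nat) (E : List (Int × Int)), E.length ≤ n →
    ∀ (a : List Int) (v : Int), pvTree E →
    (∀ x ∈ pvV E, 0 ≤ x ∧ x < (a.length : Int)) → pvVsum E a = 0 → pvDeg E v = 1 →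
    pvC E a = |getI a v| + pvC (pvPrune E v) (setI a (pvNbr E v) (getI a (pvNbr E v) + getI a v)) := by
  intro n
  induction n with
  | zero =>
    intro E hlen a v hT hr hs hv
    have hE : E = [] := List.length_eq_zero_iff.1 (by omega)
    subst hE
    exfalso
    have := hT.2.2
    simp [pvV_nil] at this
  | succ n ih =>
    intro E hlen a v hT hr hs hv
    obtain ⟨m, hm, hdm⟩ := pvFindLeaf_isSome hv
    rw [pvC_eq_some (a := a) hm]
    by_cases hmv : m = v
    · subst hmv; rfl
    set p := pvNbr E v with hpdef
    set q := pvNbr E m with hqdef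
    have hadjv := pvNbr_adj hT.1 hv
    have hadjm := pvNbr_adj hT.1 hdm
    have hvV : v ∈ pvV E := (mem_pvV_of_adj hadjv.1).1
    have hpV : p ∈ pvV E := (mem_pvV_of_adj hadjv.1).2
    have hmV : m ∈ pvV E := (mem_pvV_of_adj hadjm.1).1
    have hqV : q ∈ pvV E := (mem_pvV_of_adj hadjm.1).2
    by_cases h1 : E.length = 1
    · -- single edge {v, m}
      obtain ⟨e, he⟩ := List.length_eq_one_iff.1 h1
      subst he
      have hne := hT.1 e (List.mem_cons_self ..)
      have hvm : (e.1 = v ∧ e.2 = m) ∨ (e.1 = m ∧ e.2 = v) := by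
        have h1' := mem_pvV.1 hvV
        have h2' := mem_pvV.1 hmV
        simp at h1' h2'
        rcases h1' with h1' | h1' <;> rcases h2' with h2' | h2'
        · exact absurd (by omega) hmv
        · exact Or.inl ⟨by omega, by omega⟩
        · exact Or.inr ⟨by omega, by omega⟩
        · exact absurd (by omega) hmv
      have hnm : pvNbrs [e] m = [v] := by
        rcases hvm with ⟨ha, hb⟩ | ⟨ha, hb⟩ <;> rw [pvNbrs_cons, pvNbrs_nil, List.append_nil]
        · rw [if_neg (by rw [ha]; exact fun hc => hmv hc.symm), if_pos hb, ha]
        · rw [if_pos ha, hb]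
      have hnv : pvNbrs [e] v = [m] := by
        rcases hvm with ⟨ha, hb⟩ | ⟨ha, hb⟩ <;> rw [pvNbrs_cons, pvNbrs_nil, List.append_nil]
        · rw [if_pos ha, hb]
        · rw [if_neg (by rw [ha]; exact hmv), if_pos hb, ha]
      have hqv : q = v := by
        have h' := nbrs_deg_one hdm
        rw [hnm, ← hqdef] at h'
        exact (List.cons.injEq _ _ _ _ ▸ h').1.symm
      have hpm : p = m := by
        have h' := nbrs_deg_one hv
        rw [hnv, ← hpdef] at h'
        exact (List.cons.injEq _ _ _ _ ▸ h').1.symm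
      have hincm : pvInc m e = true := by
        unfold pvInc
        rcases hvm with ⟨ha, hb⟩ | ⟨ha, hb⟩ <;> simp [ha, hb]
      have hincv : pvInc v e = true := by
        unfold pvInc
        rcases hvm with ⟨ha, hb⟩ | ⟨ha, hb⟩ <;> simp [ha, hb]
      have hprm : pvPrune [e] m = [] := by
        unfold pvPrune
        rw [List.filter_cons_of_neg (by simp [hincm]), List.filter_nil]
      have hprv : pvPrune [e] v = [] := by
        unfold pvPrune
        rw [List.filter_cons_of_neg (by simp [hincv]), List.filter_nil]
      rw [hqv, hpm, hprm, hprv, pvC_nil, pvC_nil, add_zero, add_zero]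
      have hval : getI a m = -getI a v := by
        rw [vsum_single hne] at hs
        rcases hvm with ⟨ha, hb⟩ | ⟨ha, hb⟩ <;> rw [ha, hb] at hs <;> omega
      rw [hval, abs_neg]
    · -- at least two edges
      have hEne : E ≠ [] := by
        rcases hadjm.1 with h | h <;> exact List.ne_nil_of_mem h
      have h2 : 2 ≤ E.length := by
        have := List.length_pos_iff.2 hEne
        omega
      have hqm : q ≠ v := by
        intro hc
        have hdq : pvDeg E (pvNbr E m) = 1 := by rw [← hqdef, hc]; exact hv
        have := adjacent_leaves hT hdm hdq
        omega
      have hpm : p ≠ m := by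
        intro hc
        have hdp : pvDeg E (pvNbr E v) = 1 := by rw [← hpdef, hc]; exact hdm
        have := adjacent_leaves hT hv hdp
        omega
      have hvm' : v ≠ m := fun hc => hmv hc.symm
      have hqv' : v ≠ q := fun hc => hqm hc.symm
      have hmp' : m ≠ p := fun hc => hpm hc.symm
      -- nonnegativity
      have h0v := (hr v hvV).1
      have h0p := (hr p hpV).1
      have h0m := (hr m hmV).1
      have h0q := (hr q hqV).1
      set a1 := setI a q (getI a q + getI a m) with ha1
      set a2 := setI a p (getI a p + getI a v) with ha2
      set E1 := pvPrune E m with hE1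
      set E2 := pvPrune E v with hE2
      have hT1 : pvTree E1 := tree_prune hT hdm h2
      have hT2 : pvTree E2 := tree_prune hT hv h2
      have hlen1 : E1.length ≤ n := by rw [hE1]; have := prune_length_of_leaf hdm; omega
      have hlen2 : E2.length ≤ n := by rw [hE2]; have := prune_length_of_leaf hv; omega
      have hnbrs1 : pvNbrs E1 v = pvNbrs E v := nbrs_prune_other hT.1 hdm hvm' hqv'
      have hnbrs2 : pvNbrs E2 m = pvNbrs E m := nbrs_prune_other hT.1 hv hmv hmp'
      have hv1 : pvDeg E1 v = 1 := by unfold pvDeg; rw [hnbrs1]; exact hv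
      have hm2 : pvDeg E2 m = 1 := by unfold pvDeg; rw [hnbrs2]; exact hdm
      have hnbr1 : pvNbr E1 v = p := by rw [pvNbr_congr hnbrs1, ← hpdef]
      have hnbr2 : pvNbr E2 m = q := by rw [pvNbr_congr hnbrs2, ← hqdef]
      have hlena1 : a1.length = a.length := length_setI a q _
      have hlena2 : a2.length = a.length := length_setI a p _
      have hr1 : ∀ x ∈ pvV E1, 0 ≤ x ∧ x < (a1.length : Int) := by
        intro x hx
        rw [hlena1]
        exact hr x (mem_pvV_prune hx)
      have hr2 : ∀ x ∈ pvV E2, 0 ≤ x ∧ x < (a2.length : Int) := by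
        intro x hx
        rw [hlena2]
        exact hr x (mem_pvV_prune hx)
      have hs1 : pvVsum E1 a1 = 0 := by
        rw [hE1, ha1, hqdef]
        rw [vsum_prune hT hdm h2 hr]
        exact hs
      have hs2 : pvVsum E2 a2 = 0 := by
        rw [hE2, ha2, hpdef]
        rw [vsum_prune hT hv h2 hr]
        exact hs
      have IH1 := ih E1 hlen1 a1 v hT1 hr1 hs1 hv1
      have IH2 := ih E2 hlen2 a2 m hT2 hr2 hs2 hm2
      rw [hnbr1] at IH1
      rw [hnbr2] at IH2
      have hg1v : getI a1 v = getI a v := getI_setI_ne h0q h0v (fun hc => hqv' hc.symm) _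
      have hg2m : getI a2 m = getI a m := getI_setI_ne h0p h0m (fun hc => hmp' hc.symm) _
      rw [IH1, IH2, hg1v, hg2m]
      have hEcomm : pvPrune E1 v = pvPrune E2 m := by
        rw [hE1, hE2]; exact pvPrune_comm E m v
      have harr : setI a1 p (getI a1 p + getI a v) = setI a2 q (getI a2 q + getI a m) := by
        by_cases hpq : p = q
        · have hg1p : getI a1 p = getI a p + getI a m := by
            rw [ha1, ← hpq, getI_setI_self h0p (hr p hpV).2]
          have hg2q : getI a2 q = getI a p + getI a v := by
            rw [ha2, ← hpq, getI_setI_self h0p (hr p hpV).2]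
          rw [hg1p, hg2q, ha1, ha2, ← hpq, setI_setI, setI_setI]
          have harith : getI a p + getI a m + getI a v = getI a p + getI a v + getI a m := by ring
          rw [harith]
        · have hg1p : getI a1 p = getI a p := getI_setI_ne h0q h0p (fun hc => hpq hc.symm) _
          have hg2q : getI a2 q = getI a q := getI_setI_ne h0p h0q hpq _
          rw [hg1p, hg2q, ha1, ha2, setI_comm h0q h0p (fun hc => hpq hc.symm)]
      rw [hEcomm, harr]
      ring
-- dict helper facts (PySem.Dict.erase / PySem.List.remove? are transparent definitions)
lemma dict_erase_get? (d : PySem.Dict Int (List Int)) (k x : Int) :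
    (d.erase k).get? x = if x = k then none else d.get? x := by
  obtain ⟨items⟩ := d
  unfold PySem.Dict.erase PySem.Dict.get?
  simp only
  induction items with
  | nil => simp
  | cons it items ih =>
    by_cases hk : it.1 = k
    · rw [List.filter_cons_of_neg (by simp [hk])]
      by_cases hx : x = k
      · rw [if_pos hx] at ih ⊢
        exact ih
      · rw [if_neg hx] at ih ⊢
        rw [List.find?_cons_of_neg (by simp; intro hc; exact absurd (hk.symm.trans hc).symm hx)]
        exact ih
    · rw [List.filter_cons_of_pos (by simp [hk])]
      by_cases hit : it.1 = x
      · rw [List.find?_cons_of_pos (by simp [hit]), if_neg (fun hc => hk (hit.trans hc)),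
          List.find?_cons_of_pos (by simp [hit])]
      · rw [List.find?_cons_of_neg (by simp [hit]), List.find?_cons_of_neg (by simp [hit])]
        exact ih

lemma dict_erase_keys (d : PySem.Dict Int (List Int)) (k : Int) :
    (d.erase k).keys = d.keys.filter (fun x => !(x == k)) := by
  obtain ⟨items⟩ := d
  unfold PySem.Dict.erase PySem.Dict.keys
  simp only
  induction items with
  | nil => simp
  | cons it items ih =>
    by_cases hk : it.1 = k
    · rw [List.filter_cons_of_neg (by simp [hk]), List.map_cons, List.filter_cons_of_neg (by simp [hk])]
      exact ih
    · rw [List.filter_cons_of_pos (by simp [hk]), List.map_cons, List.map_cons,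
        List.filter_cons_of_pos (by simp [hk])]
      rw [ih]

lemma remove?_eq_erase {xs : List Int} {v : Int} (h : v ∈ xs) :
    PySem.List.remove? xs v = some (xs.erase v) := by
  unfold PySem.List.remove?
  induction xs with
  | nil => simp at h
  | cons x xs ih =>
    rw [show List.idxOf? v (x::xs) = if x = v then some 0 else (List.idxOf? v xs).map (·+1) by
      simp [List.idxOf?_cons]]
    by_cases hx : x = v
    · rw [if_pos hx]
      simp [List.erase_cons_head, hx]
    · have hv : v ∈ xs := by
        rcases List.mem_cons.1 h with h' | h'
        · exact absurd h'.symm hx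
        · exact h'
      rw [if_neg hx, List.erase_cons_tail (by simp [hx])]
      obtain ⟨k, hk⟩ : ∃ k, List.idxOf? v xs = some k := by
        have := ih hv
        cases hfind : List.idxOf? v xs with
        | none => rw [hfind] at this; simp at this
        | some k => exact ⟨k, rfl⟩
      have h2 := ih hv
      rw [hk] at h2 ⊢
      simp at h2 ⊢
      rw [← h2]
def pvRepA (g : PySem.Dict Int (List Int)) (E : List (Int × Int)) : Prop :=
  g.keys.Nodup ∧ (∀ x : Int, x ∈ g.keys ↔ x ∈ pvV E) ∧
  (∀ (x : Int) (l : List Int), g.get? x = some l → l.Perm (pvNbrs E x))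

lemma rep_getD {g : PySem.Dict Int (List Int)} {E : List (Int × Int)} (hrep : pvRepA g E)
    (x : Int) : (g.getD x []).Perm (pvNbrs E x) := by
  rw [PySem.Dict.getD_eq_get?_getD]
  cases hg : g.get? x with
  | none =>
    have hx : x ∉ g.keys := (PySem.Dict.get?_eq_none_iff_not_mem_keys _ _).1 hg
    have : x ∉ pvV E := fun hc => hx ((hrep.2.1 x).2 hc)
    rw [pvNbrs_eq_nil_of_not_mem this]
    simp
  | some l =>
    simpa using hrep.2.2 x l hg

lemma mem_pvV_append {E F : List (Int × Int)} {x : Int} :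
    x ∈ pvV (E ++ F) ↔ x ∈ pvV E ∨ x ∈ pvV F := by
  simp only [mem_pvV, List.mem_append]
  constructor
  · rintro ⟨e, (he | he), hor⟩
    · exact Or.inl ⟨e, he, hor⟩
    · exact Or.inr ⟨e, he, hor⟩
  · rintro (⟨e, he, hor⟩ | ⟨e, he, hor⟩)
    · exact ⟨e, Or.inl he, hor⟩
    · exact ⟨e, Or.inr he, hor⟩

lemma pvNbrs_single_fst {u v : Int} (_huv : u ≠ v) : pvNbrs [(u, v)] u = [v] := by
  rw [pvNbrs_cons, pvNbrs_nil, List.append_nil, if_pos rfl]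

lemma pvNbrs_single_snd {u v : Int} (huv : u ≠ v) : pvNbrs [(u, v)] v = [u] := by
  rw [pvNbrs_cons, pvNbrs_nil, List.append_nil, if_neg huv, if_pos rfl]

lemma pvNbrs_single_other {u v x : Int} (hu : x ≠ u) (hv : x ≠ v) : pvNbrs [(u, v)] x = [] := by
  rw [pvNbrs_cons, pvNbrs_nil, List.append_nil, if_neg (fun hc => hu hc.symm),
    if_neg (fun hc => hv hc.symm)]

lemma build_step {g : PySem.Dict Int (List Int)} {P : List (Int × Int)} {u v : Int}
    (hrep : pvRepA g P) (huv : u ≠ v) :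
    pvRepA ((g.insert u ((g.getD u []) ++ [v])).insert v
              (((g.insert u ((g.getD u []) ++ [v])).getD v []) ++ [u])) (P ++ [(u, v)]) := by
  set g1 := g.insert u ((g.getD u []) ++ [v]) with hg1
  set g2 := g1.insert v ((g1.getD v []) ++ [u]) with hg2
  have hnodup1 : g1.keys.Nodup := PySem.Dict.nodup_keys_insert _ _ _ hrep.1
  have hnodup2 : g2.keys.Nodup := PySem.Dict.nodup_keys_insert _ _ _ hnodup1
  refine ⟨hnodup2, ?_, ?_⟩
  · intro x
    rw [hg2, PySem.Dict.mem_keys_insert, hg1, PySem.Dict.mem_keys_insert, hrep.2.1 x,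
      mem_pvV_append]
    constructor
    · rintro (h | h | h)
      · exact Or.inr (mem_pvV.2 ⟨(u, v), by simp, Or.inr h.symm⟩)
      · exact Or.inr (mem_pvV.2 ⟨(u, v), by simp, Or.inl h.symm⟩)
      · exact Or.inl h
    · rintro (h | h)
      · exact Or.inr (Or.inr h)
      · rcases mem_pvV.1 h with ⟨e, he, hor⟩
        simp at he
        subst he
        rcases hor with h | h
        · exact Or.inr (Or.inl h.symm)
        · exact Or.inl h.symm
  · intro x l hget
    rw [pvNbrs_append]
    by_cases hxv : x = v
    · subst hxv
      rw [hg2, PySem.Dict.get?_insert_self] at hget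
      cases hget
      rw [pvNbrs_single_snd huv]
      have hgd : g1.getD x [] = g.getD x [] := by
        rw [hg1, PySem.Dict.getD_insert]
        rw [if_neg (fun hc => huv hc.symm)]
      rw [hgd]
      exact (rep_getD hrep x).append_right _
    · rw [hg2, PySem.Dict.get?_insert_of_ne _ _ hxv] at hget
      by_cases hxu : x = u
      · subst hxu
        rw [hg1, PySem.Dict.get?_insert_self] at hget
        cases hget
        rw [pvNbrs_single_fst huv]
        exact (rep_getD hrep x).append_right _
      · rw [hg1, PySem.Dict.get?_insert_of_ne _ _ hxu] at hget
        rw [pvNbrs_single_other hxu hxv, List.append_nil]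
        exact hrep.2.2 x l hget
lemma rep_empty : pvRepA PySem.Dict.empty [] := by
  refine ⟨?_, ?_, ?_⟩
  · simp [PySem.Dict.empty, PySem.Dict.keys]
  · intro x
    simp [PySem.Dict.empty, PySem.Dict.keys, pvV_nil]
  · intro x l hget
    simp [PySem.Dict.empty, PySem.Dict.get?] at hget

lemma build_rep_aux : ∀ (edges : List (List Int)) (g : PySem.Dict Int (List Int))
    (P : List (Int × Int)),
    (∀ e ∈ edges, e.length = 2 ∧ e.getD 0 0 ≠ e.getD 1 0) → pvRepA g P →
    pvRepA (edges.foldl pvABuild g) (P ++ pvEdges edges) := by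
  intro edges
  induction edges with
  | nil => intro g P _ hrep; simpa [pvEdges] using hrep
  | cons e edges ih =>
    intro g P hshape hrep
    have hsh := hshape e (List.mem_cons_self ..)
    obtain ⟨u, v, rfl⟩ : ∃ u v : Int, e = [u, v] := by
      rcases List.length_eq_two.1 hsh.1 with ⟨u, v, rfl⟩
      exact ⟨u, v, rfl⟩
    have huv : u ≠ v := hsh.2
    rw [List.foldl_cons]
    have hEe : pvEdges ([u, v] :: edges) = (u, v) :: pvEdges edges := rfl
    rw [hEe, List.append_cons]
    exact ih _ _ (fun f hf => hshape f (List.mem_cons_of_mem _ hf)) (build_step hrep huv)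

lemma pvALoop_stop {g : PySem.Dict Int (List Int)} {a : List Int} {ans : Int} {fuel : Nat}
    (h : ¬ 1 < g.size) (hf : 0 < fuel) : pvALoop fuel g a ans = (a, ans) := by
  obtain ⟨f, rfl⟩ : ∃ f, fuel = f + 1 := ⟨fuel - 1, by omega⟩
  simp only [pvALoop]
  rw [if_neg h]
lemma pyGetD_getI {a : List Int} {x : Int} (h0 : 0 ≤ x) :
    PySem.List.pyGetD a x 0 = getI a x := by
  rw [show x = ((x.toNat : Nat) : Int) by omega, PySem.List.pyGetD_natCast]
  rfl

lemma pySetD_setI {a : List Int} {x : Int} (h0 : 0 ≤ x) (w : Int) :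
    PySem.List.pySetD a x w = setI a x w := by
  rw [show x = ((x.toNat : Nat) : Int) by omega, PySem.List.pySetD_natCast]
  rfl

lemma pvALoop_spec : ∀ (n : Nat) (E : List (Int × Int)), E.length ≤ n →
    ∀ (g : PySem.Dict Int (List Int)) (a aC : List Int) (ans : Int) (fuel : Nat),
    pvTree E → pvRepA g E → E.length + 1 ≤ fuel →
    (∀ x ∈ pvV E, 0 ≤ x ∧ x < (a.length : Int)) → a.length = aC.length →
    (∀ x ∈ pvV E, getI a x = getI aC x) → pvVsum E aC = 0 →
    ∃ afin, pvALoop fuel g a ans = (afin, ans + pvC E aC) ∧ afin.sum = a.sum := by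
  intro n
  induction n with
  | zero =>
    intro E hlen _ _ _ _ _ hT _ _ _ _ _
    exfalso
    have hE : E = [] := List.length_eq_zero_iff.1 (by omega)
    subst hE
    have := hT.2.2
    simp [pvV_nil] at this
  | succ n ih =>
    intro E hlen g a aC ans fuel hT hrep hfuel hr hlena hagree hsC
    have hEne : E ≠ [] := by
      intro hc
      subst hc
      have := hT.2.2
      simp [pvV_nil] at this
    have hlpos : 0 < E.length := List.length_pos_iff.2 hEne
    obtain ⟨f, rfl⟩ : ∃ f, fuel = f + 1 := ⟨fuel - 1, by omega⟩
    have hkeysF : g.keys.toFinset = pvV E :=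
      Finset.ext (fun x => by rw [List.mem_toFinset]; exact hrep.2.1 x)
    have hsz : g.size = E.length + 1 := by
      have h1 : g.keys.length = (pvV E).card := by
        rw [← hkeysF, List.toFinset_card_of_nodup hrep.1]
      have h2 : g.size = g.keys.length := by
        unfold PySem.Dict.size PySem.Dict.keys
        simp
      rw [h2, h1, hT.2.2]
    -- the first leaf in dict order
    obtain ⟨w, hw⟩ := exists_leaf hT hEne
    have hwV : w ∈ pvV E := pvDeg_pos_iff.1 (by omega)
    obtain ⟨lw, hlw⟩ : ∃ lw, g.get? w = some lw := by
      cases hg : g.get? w with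
      | none =>
        exact absurd ((hrep.2.1 w).2 hwV) ((PySem.Dict.get?_eq_none_iff_not_mem_keys _ _).1 hg)
      | some l => exact ⟨l, rfl⟩
    have hlw1 : lw.length = 1 := by
      rw [(hrep.2.2 w lw hlw).length_eq, nbrs_deg_one hw]
      rfl
    have hfindSome : ((g.items.find? (fun kv => kv.2.length == 1))).isSome := by
      rw [List.find?_isSome]
      exact ⟨(w, lw), (PySem.Dict.get?_eq_some_iff_mem_items _ _ _ hrep.1).1 hlw, by simp [hlw1]⟩
    obtain ⟨⟨node, l⟩, hfind⟩ := Option.isSome_iff_exists.1 hfindSome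
    have hmem := List.mem_of_find?_eq_some hfind
    have hpred : l.length = 1 := by simpa using List.find?_some hfind
    have hgetnode : g.get? node = some l :=
      (PySem.Dict.get?_eq_some_iff_mem_items _ _ _ hrep.1).2 hmem
    have hlperm : l.Perm (pvNbrs E node) := hrep.2.2 node l hgetnode
    have hdnode : pvDeg E node = 1 := by
      unfold pvDeg
      rw [← hlperm.length_eq, hpred]
    set p := pvNbr E node with hpdef
    have hleq : l = [p] := by
      have hn := nbrs_deg_one hdnode
      rw [← hpdef] at hn
      rw [hn] at hlperm
      exact List.perm_singleton.1 hlperm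
    have hadj := pvNbr_adj hT.1 hdnode
    have hnodeV : node ∈ pvV E := (mem_pvV_of_adj hadj.1).1
    have hpV : p ∈ pvV E := (mem_pvV_of_adj hadj.1).2
    have hpne : p ≠ node := hadj.2
    have hgdp : (g.getD p []).Perm (pvNbrs E p) := rep_getD hrep p
    have hnodemem : node ∈ g.getD p [] := by
      rw [hgdp.mem_iff]
      exact adj_mem_pvNbrs (fun hc => hpne hc.symm) hadj.1
    have hremove := remove?_eq_erase hnodemem
    -- ranges
    have h0node := (hr node hnodeV).1
    have h0p := (hr p hpV).1
    have hlnode := (hr node hnodeV).2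
    have hlp := (hr p hpV).2
    -- value bookkeeping
    set a1 := setI a p (getI a p + getI a node) with ha1
    set a2 := setI a1 node 0 with ha2
    have hlena1 : a1.length = a.length := length_setI a p _
    have hlena2 : a2.length = a.length := by rw [ha2, length_setI, hlena1]
    have hg1node : getI a1 node = getI a node :=
      getI_setI_ne h0p h0node (fun hc => hpne hc) _
    -- unfold one loop iteration
    have hstep : pvALoop (f+1) g a ans
        = pvALoop f ((g.insert p ((g.getD p []).erase node)).erase node) a2
            (ans + |getI a node|) := by
      simp only [pvALoop]
      rw [if_pos (by omega)]
      rw [hfind]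
      simp only
      rw [hleq, PySem.List.pyGetD_zero_cons, hremove]
      simp only
      rw [pyGetD_getI h0p, pyGetD_getI h0node, pySetD_setI h0p, ← ha1,
        pyGetD_getI h0node, pySetD_setI h0node, ← ha2, hg1node]
    rw [hstep]
    -- the pruned tree
    set E' := pvPrune E node with hE'
    set aC' := setI aC p (getI aC p + getI aC node) with haC'
    have hglen : getI a node = getI aC node := hagree node hnodeV
    have hCeq : pvC E aC = |getI aC node| + pvC E' aC' := by
      rw [hE', haC', hpdef]
      exact pvC_exchange E.length E (le_refl _) aC node hT
        (fun x hx => by rw [← hlena]; exact hr x hx) hsC hdnode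
    -- the new dict
    set g' := (g.insert p ((g.getD p []).erase node)).erase node with hg'
    have hkeys1 : (g.insert p ((g.getD p []).erase node)).keys = g.keys := by
      apply PySem.Dict.keys_insert_of_contains
      exact (PySem.Dict.contains_iff_mem_keys _ _).2 ((hrep.2.1 p).2 hpV)
    have hnodup' : g'.keys.Nodup := by
      rw [hg', dict_erase_keys, hkeys1]
      exact hrep.1.filter _
    have hmemk' : ∀ x : Int, x ∈ g'.keys ↔ (x ∈ pvV E ∧ x ≠ node) := by
      intro x
      rw [hg', dict_erase_keys, hkeys1, List.mem_filter, hrep.2.1 x]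
      simp
    have hget' : ∀ (x : Int) (lx : List Int), g'.get? x = some lx →
        lx.Perm (pvNbrs E' x) := by
      intro x lx hgx
      rw [hg', dict_erase_get?] at hgx
      by_cases hxn : x = node
      · rw [if_pos hxn] at hgx; cases hgx
      · rw [if_neg hxn] at hgx
        by_cases hxp : x = p
        · subst hxp
          rw [PySem.Dict.get?_insert_self] at hgx
          cases hgx
          have hperm := nbrs_perm_prune hT.1 hdnode
          rw [← hpdef, ← hE'] at hperm
          have herase := hgdp.erase node
          have h2 := hperm.erase node
          rw [List.erase_cons_head] at h2
          exact herase.trans h2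
        · rw [PySem.Dict.get?_insert_of_ne _ _ hxp] at hgx
          have hbase := hrep.2.2 x lx hgx
          rw [hE', nbrs_prune_other hT.1 hdnode hxn hxp]
          exact hbase
    -- case split on the size of E
    by_cases h1 : E.length = 1
    · -- E' = [] and the loop stops with one key left
      have hE'nil : E' = [] := by
        rw [hE']
        have := prune_length_of_leaf hdnode
        exact List.length_eq_zero_iff.1 (by omega)
      have hsz' : g'.size = 1 := by
        have hkeyset : g'.keys.toFinset = {p} := by
          apply Finset.ext
          intro x
          rw [List.mem_toFinset, hmemk' x, Finset.mem_singleton]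
          constructor
          · rintro ⟨hxV, hxn⟩
            by_contra hxp
            have hd : 0 < pvDeg E x := pvDeg_pos_iff.2 hxV
            have hd' : pvDeg E' x = pvDeg E x := by
              unfold pvDeg
              rw [hE', nbrs_prune_other hT.1 hdnode hxn hxp]
            have hz : pvDeg E' x = 0 := by
              rw [hE'nil]
              unfold pvDeg
              rw [pvNbrs_nil]
              rfl
            omega
          · rintro rfl
            exact ⟨hpV, hpne⟩
        have h2 : g'.size = g'.keys.length := by
          unfold PySem.Dict.size PySem.Dict.keys
          simp
        rw [h2, ← List.toFinset_card_of_nodup hnodup', hkeyset]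
        rfl
      refine ⟨a2, ?_, ?_⟩
      · rw [pvALoop_stop (by omega) (by omega), hCeq, hE'nil, pvC_nil, hglen]
        ring_nf
      · rw [ha2, ha1]
        rw [sum_setI h0node (by rw [length_setI]; exact hlnode),
            getI_setI_ne h0p h0node hpne,
            sum_setI h0p hlp]
        ring
    · -- at least two edges: recurse
      have h2 : 2 ≤ E.length := by omega
      have hT' : pvTree E' := tree_prune hT hdnode h2
      have hlen' : E'.length ≤ n := by
        rw [hE']
        have := prune_length_of_leaf hdnode
        omega
      have hrep' : pvRepA g' E' := by
        refine ⟨hnodup', ?_, hget'⟩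
        intro x
        rw [hmemk' x, hE', V_prune hT hdnode h2, Finset.mem_erase]
        tauto
      have hfuel' : E'.length + 1 ≤ f := by
        rw [hE']
        have := prune_length_of_leaf hdnode
        omega
      have hVsub : pvV E' ⊆ pvV E := fun x hx => mem_pvV_prune (by rw [← hE']; exact hx)
      have hr' : ∀ x ∈ pvV E', 0 ≤ x ∧ x < (a2.length : Int) := by
        intro x hx
        rw [hlena2]
        exact hr x (hVsub hx)
      have hlena' : a2.length = aC'.length := by
        rw [hlena2, haC', length_setI, hlena]
      have hVnode : ∀ x ∈ pvV E', x ≠ node := by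
        intro x hx hc
        subst hc
        have hd : 0 < pvDeg E' x := pvDeg_pos_iff.2 hx
        rw [hE', deg_prune_self] at hd
        omega
      have hagree' : ∀ x ∈ pvV E', getI a2 x = getI aC' x := by
        intro x hx
        have hxV : x ∈ pvV E := hVsub hx
        have hxn : x ≠ node := hVnode x hx
        have h0x := (hr x hxV).1
        rw [ha2, getI_setI_ne h0node h0x (fun hc => hxn hc.symm)]
        by_cases hxp : x = p
        · subst hxp
          rw [ha1, getI_setI_self h0p hlp, haC', getI_setI_self h0p (by rw [← hlena]; exact hlp)]
          rw [hagree p hpV, hglen]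
        · rw [ha1, getI_setI_ne h0p h0x (fun hc => hxp hc.symm),
            haC', getI_setI_ne h0p h0x (fun hc => hxp hc.symm)]
          exact hagree x hxV
      have hsC' : pvVsum E' aC' = 0 := by
        rw [hE', haC', hpdef]
        rw [vsum_prune hT hdnode h2 (fun x hx => by rw [← hlena]; exact hr x hx)]
        exact hsC
      obtain ⟨afin, hloop, hsum⟩ :=
        ih E' hlen' g' a2 aC' (ans + |getI a node|) f hT' hrep' hfuel' hr' hlena' hagree' hsC'
      refine ⟨afin, ?_, ?_⟩
      · rw [hloop, hCeq, hglen]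
        ring_nf
      · rw [hsum, ha2, ha1]
        rw [sum_setI h0node (by rw [length_setI]; exact hlnode),
            getI_setI_ne h0p h0node hpne,
            sum_setI h0p hlp]
        ring
lemma getI_setI {a : List Int} {x y : Int} (h0x : 0 ≤ x) (h0y : 0 ≤ y)
    (hxl : x < (a.length : Int)) (w : Int) :
    getI (setI a x w) y = if y = x then w else getI a y := by
  by_cases h : y = x
  · subst h; rw [if_pos rfl, getI_setI_self h0x hxl]
  · rw [if_neg h, getI_setI_ne h0x h0y (fun hc => h hc.symm)]

lemma getI_replicate (n : Nat) (x : Int) : getI (List.replicate n (0 : Int)) x = 0 := by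
  unfold getI
  rw [List.getD_eq_getElem?_getD, List.getElem?_replicate]
  split <;> simp

lemma pvDeg_append_single {P : List (Int × Int)} {u v : Int} (huv : u ≠ v) (x : Int) :
    (pvDeg (P ++ [(u, v)]) x : Int)
      = (pvDeg P x : Int) + (if x = u then 1 else 0) + (if x = v then 1 else 0) := by
  unfold pvDeg
  rw [pvNbrs_append, List.length_append]
  by_cases hu : x = u
  · subst hu
    rw [pvNbrs_single_fst huv, if_pos rfl, if_neg (fun hc => huv hc)]
    simp
  · by_cases hv : x = v
    · subst hv
      rw [pvNbrs_single_snd huv, if_neg hu, if_pos rfl]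
      simp
    · rw [pvNbrs_single_other hu hv, if_neg hu, if_neg hv]
      simp

lemma pvNbrsSum_append_single {P : List (Int × Int)} {u v : Int} (huv : u ≠ v) (x : Int) :
    (pvNbrs (P ++ [(u, v)]) x).sum
      = (pvNbrs P x).sum + (if x = u then v else 0) + (if x = v then u else 0) := by
  rw [pvNbrs_append, List.sum_append]
  by_cases hu : x = u
  · subst hu
    rw [pvNbrs_single_fst huv, if_pos rfl, if_neg (fun hc => huv hc)]
    simp
  · by_cases hv : x = v
    · subst hv
      rw [pvNbrs_single_snd huv, if_neg hu, if_pos rfl]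
      simp
    · rw [pvNbrs_single_other hu hv, if_neg hu, if_neg hv]
      simp

lemma b_build_aux : ∀ (edges : List (List Int)) (dn : List Int × List Int)
    (P : List (Int × Int)) (N : Nat),
    (∀ e ∈ edges, e.length = 2 ∧ 0 ≤ e.getD 0 0 ∧ e.getD 0 0 < (N : Int) ∧
      0 ≤ e.getD 1 0 ∧ e.getD 1 0 < (N : Int) ∧ e.getD 0 0 ≠ e.getD 1 0) →
    dn.1.length = N → dn.2.length = N →
    (∀ x : Int, 0 ≤ x → x < (N : Int) → getI dn.1 x = (pvDeg P x : Int)) →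
    (∀ x : Int, 0 ≤ x → x < (N : Int) → getI dn.2 x = (pvNbrs P x).sum) →
    (edges.foldl pvBStep dn).1.length = N ∧
    (edges.foldl pvBStep dn).2.length = N ∧
    (∀ x : Int, 0 ≤ x → x < (N : Int) →
      getI (edges.foldl pvBStep dn).1 x = (pvDeg (P ++ pvEdges edges) x : Int)) ∧
    (∀ x : Int, 0 ≤ x → x < (N : Int) →
      getI (edges.foldl pvBStep dn).2 x = (pvNbrs (P ++ pvEdges edges) x).sum) := by
  intro edges
  induction edges with
  | nil =>
    intro dn P N _ h1 h2 h3 h4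
    refine ⟨h1, h2, ?_, ?_⟩ <;> intro x hx0 hxN <;>
      simp only [List.foldl_nil, pvEdges, List.map_nil, List.append_nil]
    · exact h3 x hx0 hxN
    · exact h4 x hx0 hxN
  | cons e edges ih =>
    intro dn P N hshape h1 h2 h3 h4
    have hsh := hshape e (List.mem_cons_self ..)
    obtain ⟨u, v, rfl⟩ : ∃ u v : Int, e = [u, v] := by
      rcases List.length_eq_two.1 hsh.1 with ⟨u, v, rfl⟩
      exact ⟨u, v, rfl⟩
    have hu0 : (0:Int) ≤ u := hsh.2.1
    have huN : u < (N : Int) := hsh.2.2.1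
    have hv0 : (0:Int) ≤ v := hsh.2.2.2.1
    have hvN : v < (N : Int) := hsh.2.2.2.2.1
    have huv : u ≠ v := hsh.2.2.2.2.2
    rw [List.foldl_cons]
    have hEe : pvEdges ([u, v] :: edges) = (u, v) :: pvEdges edges := rfl
    rw [hEe, List.append_cons]
    have hred : pvBStep dn [u, v]
        = (setI (setI dn.1 u (getI dn.1 u + 1)) v (getI (setI dn.1 u (getI dn.1 u + 1)) v + 1),
           setI (setI dn.2 u (getI dn.2 u + v)) v (getI (setI dn.2 u (getI dn.2 u + v)) v + u)) := by
      unfold pvBStep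
      simp only
      rw [pyGetD_getI hu0, pySetD_setI hu0, pyGetD_getI hv0, pySetD_setI hv0,
        pyGetD_getI hu0, pySetD_setI hu0, pyGetD_getI hv0, pySetD_setI hv0]
    rw [hred]
    apply ih _ (P ++ [(u, v)]) N (fun f hf => hshape f (List.mem_cons_of_mem _ hf))
    · simp only [length_setI]; exact h1
    · simp only [length_setI]; exact h2
    · intro x hx0 hxN
      simp only
      rw [getI_setI hv0 hx0 (by rw [length_setI, h1]; exact hvN),
        getI_setI hu0 hv0 (by rw [h1]; exact huN),
        getI_setI hu0 hx0 (by rw [h1]; exact huN),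
        pvDeg_append_single huv]
      have e1 := h3 x hx0 hxN
      have e2 := h3 u hu0 huN
      have e3 := h3 v hv0 hvN
      by_cases hxv : x = v
      · subst hxv
        rw [if_pos rfl, if_pos rfl, if_neg (fun hc => huv hc.symm),
          if_neg (fun hc => huv hc.symm)]
        omega
      · rw [if_neg hxv, if_neg hxv]
        by_cases hxu : x = u
        · subst hxu
          rw [if_pos rfl, if_pos rfl]
          omega
        · rw [if_neg hxu, if_neg hxu]
          omega
    · intro x hx0 hxN
      simp only
      rw [getI_setI hv0 hx0 (by rw [length_setI, h2]; exact hvN),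
        getI_setI hu0 hv0 (by rw [h2]; exact huN),
        getI_setI hu0 hx0 (by rw [h2]; exact huN),
        pvNbrsSum_append_single huv]
      have e1 := h4 x hx0 hxN
      have e2 := h4 u hu0 huN
      have e3 := h4 v hv0 hvN
      by_cases hxv : x = v
      · subst hxv
        rw [if_pos rfl, if_pos rfl, if_neg (fun hc => huv hc.symm),
          if_neg (fun hc => huv hc.symm)]
        omega
      · rw [if_neg hxv, if_neg hxv]
        by_cases hxu : x = u
        · subst hxu
          rw [if_pos rfl, if_pos rfl]
          omega
        · rw [if_neg hxu, if_neg hxu]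
          omega
lemma pvBLoop_spec : ∀ (fuel : Nat) (E : List (Int × Int)) (deg nsum val aC : List Int)
    (queue : List Int) (head : Nat) (ans : Int),
    (pvTree E ∨ E = []) →
    (queue.length - head) + E.length < fuel →
    (∀ x ∈ queue, 0 ≤ x ∧ x < (val.length : Int)) →
    deg.length = val.length → nsum.length = val.length → aC.length = val.length →
    (∀ x ∈ pvV E, 0 ≤ x ∧ x < (val.length : Int)) →
    (∀ x : Int, 0 ≤ x → x < (val.length : Int) → getI deg x = (pvDeg E x : Int)) →
    (∀ x ∈ pvV E, getI nsum x = (pvNbrs E x).sum) →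
    (∀ x ∈ pvV E, getI val x = getI aC x) →
    (∀ x : Int, pvDeg E x = 1 → x ∈ queue.drop head) →
    pvVsum E aC = 0 →
    pvBLoop fuel deg nsum val queue head ans = ans + pvC E aC := by
  intro fuel
  induction fuel with
  | zero =>
    intro E deg nsum val aC queue head ans _ hfuel _ _ _ _ _ _ _ _ _ _
    omega
  | succ fuel ih =>
    intro E deg nsum val aC queue head ans hTor hfuel hq hldeg hlnsum hlaC hVr hdeg hnsum hval hleaf hsC
    by_cases hterm : head < queue.length
    · -- look at queue[head]
      have hvq : queue.getD head 0 ∈ queue := by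
        rw [List.getD_eq_getElem?_getD, List.getElem?_eq_getElem hterm]
        exact List.getElem_mem _
      set v := queue.getD head 0 with hvdef
      have h0v := (hq v hvq).1
      have hlv := (hq v hvq).2
      have hdegv : PySem.List.pyGetD deg v 0 = (pvDeg E v : Int) := by
        rw [pyGetD_getI h0v, hdeg v h0v hlv]
      by_cases hvleaf : pvDeg E v = 1
      · -- prune the leaf v
        have hE : pvTree E := by
          rcases hTor with h | h
          · exact h
          · subst h
            unfold pvDeg at hvleaf
            rw [pvNbrs_nil] at hvleaf
            simp at hvleaf
        have hstep1 : pvBLoop (fuel+1) deg nsum val queue head ans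
            = pvBLoop fuel
                (PySem.List.pySetD (PySem.List.pySetD deg (PySem.List.pyGetD nsum v 0) (PySem.List.pyGetD deg (PySem.List.pyGetD nsum v 0) 0 - 1)) v 0)
                (PySem.List.pySetD nsum (PySem.List.pyGetD nsum v 0) (PySem.List.pyGetD nsum (PySem.List.pyGetD nsum v 0) 0 - v))
                (PySem.List.pySetD val (PySem.List.pyGetD nsum v 0) (PySem.List.pyGetD val (PySem.List.pyGetD nsum v 0) 0 + PySem.List.pyGetD val v 0))
                (if PySem.List.pyGetD (PySem.List.pySetD (PySem.List.pySetD deg (PySem.List.pyGetD nsum v 0) (PySem.List.pyGetD deg (PySem.List.pyGetD nsum v 0) 0 - 1)) v 0) (PySem.List.pyGetD nsum v 0) 0 = 1 then queue ++ [PySem.List.pyGetD nsum v 0] else queue)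
                (head+1) (ans + |PySem.List.pyGetD val v 0|) := by
          simp only [pvBLoop]
          rw [if_pos hterm, ← hvdef]
          rw [if_neg (by rw [hdegv]; simp [hvleaf])]
        -- identify the parent p = nsum[v]
        have hvV : v ∈ pvV E := pvDeg_pos_iff.1 (by omega)
        have hpsum : PySem.List.pyGetD nsum v 0 = pvNbr E v := by
          rw [pyGetD_getI h0v, hnsum v hvV, nbrs_deg_one hvleaf]
          simp
        rw [hpsum] at hstep1
        set p := pvNbr E v with hpdef
        have hadj := pvNbr_adj hE.1 hvleaf
        have hpV : p ∈ pvV E := (mem_pvV_of_adj hadj.1).2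
        have hpv : p ≠ v := hadj.2
        have h0p := (hVr p hpV).1
        have hlp := (hVr p hpV).2
        set E' := pvPrune E v with hE'
        set aC' := setI aC p (getI aC p + getI aC v) with haC'
        -- convert the primitives
        simp only [pyGetD_getI h0p, pyGetD_getI h0v, pySetD_setI h0p, pySetD_setI h0v] at hstep1
        set deg1 := setI deg p (getI deg p - 1) with hdeg1
        set deg2 := setI deg1 v 0 with hdeg2
        set nsum1 := setI nsum p (getI nsum p - v) with hnsum1
        set val1 := setI val p (getI val p + getI val v) with hval1
        set queue1 := if getI deg2 p = 1 then queue ++ [p] else queue with hqueue1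
        rw [hstep1]
        -- lengths
        have hld1 : deg1.length = val.length := by rw [hdeg1, length_setI]; exact hldeg
        have hld2 : deg2.length = val.length := by rw [hdeg2, length_setI]; exact hld1
        have hln1 : nsum1.length = val.length := by rw [hnsum1, length_setI]; exact hlnsum
        have hlv1 : val1.length = val.length := by rw [hval1, length_setI]
        -- degree bookkeeping
        have hdegp : getI deg p = (pvDeg E p : Int) := hdeg p h0p hlp
        have hdeg_pr := deg_prune_nbr hE.1 hvleaf
        rw [← hpdef, ← hE'] at hdeg_pr
        have hd2p : getI deg2 p = (pvDeg E' p : Int) := by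
          rw [hdeg2, getI_setI_ne h0v h0p (fun hc => hpv hc.symm), hdeg1,
            getI_setI_self h0p (by rw [hldeg]; exact hlp), hdegp]
          omega
        have hd2 : ∀ x : Int, 0 ≤ x → x < (val.length : Int) → getI deg2 x = (pvDeg E' x : Int) := by
          intro x hx0 hxl
          by_cases hxv : x = v
          · subst hxv
            rw [hdeg2, getI_setI_self h0v (by rw [hld1]; exact hlv), hE', deg_prune_self]
            simp
          · rw [hdeg2, getI_setI_ne h0v hx0 (fun hc => hxv hc.symm), hdeg1]
            by_cases hxp : x = p
            · subst hxp
              rw [getI_setI_self h0p (by rw [hldeg]; exact hlp), hdegp]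
              omega
            · rw [getI_setI_ne h0p hx0 (fun hc => hxp hc.symm), hdeg x hx0 hxl]
              have : pvNbrs E' x = pvNbrs E x := by
                rw [hE']
                exact nbrs_prune_other hE.1 hvleaf hxv hxp
              unfold pvDeg
              rw [this]
        -- the pruned-state invariants
        have hVsub : pvV E' ⊆ pvV E := fun x hx => mem_pvV_prune (by rw [← hE']; exact hx)
        have hVnotv : ∀ x ∈ pvV E', x ≠ v := by
          intro x hx hc
          rw [hc] at hx
          have hd : 0 < pvDeg E' v := pvDeg_pos_iff.2 hx
          rw [hE', deg_prune_self] at hd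
          omega
        have hnbr_perm := nbrs_perm_prune hE.1 hvleaf
        rw [← hpdef, ← hE'] at hnbr_perm
        have hnsum' : ∀ x ∈ pvV E', getI nsum1 x = (pvNbrs E' x).sum := by
          intro x hx
          have hxV := hVsub hx
          have hx0 := (hVr x hxV).1
          by_cases hxp : x = p
          · subst hxp
            rw [hnsum1, getI_setI_self h0p (by rw [hlnsum]; exact hlp), hnsum p hpV]
            have := hnbr_perm.sum_eq
            rw [List.sum_cons] at this
            omega
          · rw [hnsum1, getI_setI_ne h0p hx0 (fun hc => hxp hc.symm), hnsum x hxV]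
            have : pvNbrs E' x = pvNbrs E x := by
              rw [hE']
              exact nbrs_prune_other hE.1 hvleaf (hVnotv x hx) hxp
            rw [this]
        have hval' : ∀ x ∈ pvV E', getI val1 x = getI aC' x := by
          intro x hx
          have hxV := hVsub hx
          have hx0 := (hVr x hxV).1
          by_cases hxp : x = p
          · subst hxp
            rw [hval1, getI_setI_self h0p hlp, haC',
              getI_setI_self h0p (by rw [hlaC]; exact hlp), hval p hpV, hval v hvV]
          · rw [hval1, getI_setI_ne h0p hx0 (fun hc => hxp hc.symm), haC',
              getI_setI_ne h0p hx0 (fun hc => hxp hc.symm)]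
            exact hval x hxV
        have hq1 : ∀ x ∈ queue1, 0 ≤ x ∧ x < (val1.length : Int) := by
          intro x hx
          rw [hlv1]
          rw [hqueue1] at hx
          split at hx
          · rcases List.mem_append.1 hx with h | h
            · exact hq x h
            · simp at h
              subst h
              exact ⟨h0p, hlp⟩
          · exact hq x hx
        have hleaf' : ∀ x : Int, pvDeg E' x = 1 → x ∈ queue1.drop (head+1) := by
          intro x hx
          by_cases hxp : x = p
          · rw [hxp] at hx ⊢
            have hcond : getI deg2 p = 1 := by rw [hd2p, hx]; rfl
            rw [hqueue1, if_pos hcond, List.drop_append_of_le_length (by omega)]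
            exact List.mem_append.2 (Or.inr (by simp))
          · have hxv : x ≠ v := by
              intro hc
              subst hc
              rw [hE', deg_prune_self] at hx
              omega
            have hdx : pvDeg E x = 1 := by
              have : pvNbrs E' x = pvNbrs E x := by
                rw [hE']
                exact nbrs_prune_other hE.1 hvleaf hxv hxp
              unfold pvDeg at hx ⊢
              rw [← this]
              exact hx
            have hmem := hleaf x hdx
            rw [List.drop_eq_getElem_cons hterm] at hmem
            rcases List.mem_cons.1 hmem with h | h
            · exfalso
              apply hxv
              rw [hvdef, List.getD_eq_getElem?_getD, List.getElem?_eq_getElem hterm]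
              simp [← h]
            · rw [hqueue1]
              split
              · rw [List.drop_append_of_le_length (by omega)]
                exact List.mem_append.2 (Or.inl h)
              · exact h
        have hTor' : pvTree E' ∨ E' = [] := by
          by_cases h1 : E.length = 1
          · right
            rw [hE']
            have := prune_length_of_leaf hvleaf
            exact List.length_eq_zero_iff.1 (by omega)
          · left
            have hEne : E ≠ [] := by
              intro hc
              rw [hc] at hvleaf
              unfold pvDeg at hvleaf
              rw [pvNbrs_nil] at hvleaf
              simp at hvleaf
            have : 2 ≤ E.length := by
              have := List.length_pos_iff.2 hEne
              omega
            rw [hE']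
            exact tree_prune hE hvleaf this
        have hsC' : pvVsum E' aC' = 0 := by
          by_cases h1 : E.length = 1
          · have hEnil : E' = [] := by
              rw [hE']
              have := prune_length_of_leaf hvleaf
              exact List.length_eq_zero_iff.1 (by omega)
            rw [hEnil, vsum_nil]
          · have hEne : E ≠ [] := by
              intro hc
              rw [hc] at hvleaf
              unfold pvDeg at hvleaf
              rw [pvNbrs_nil] at hvleaf
              simp at hvleaf
            have h2 : 2 ≤ E.length := by
              have := List.length_pos_iff.2 hEne
              omega
            rw [hE', haC', hpdef]
            rw [vsum_prune hE hvleaf h2 (fun x hx => by rw [hlaC]; exact hVr x hx)]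
            exact hsC
        have hfuel' : (queue1.length - (head+1)) + E'.length < fuel := by
          have hq1len : queue1.length ≤ queue.length + 1 := by
            rw [hqueue1]
            split
            · simp
            · omega
          have hE'len : E'.length + 1 = E.length := by
            rw [hE']
            exact prune_length_of_leaf hvleaf
          omega
        have hVr' : ∀ x ∈ pvV E', 0 ≤ x ∧ x < (val1.length : Int) := by
          intro x hx
          rw [hlv1]
          exact hVr x (hVsub hx)
        have hdeg2' : ∀ x : Int, 0 ≤ x → x < (val1.length : Int) → getI deg2 x = (pvDeg E' x : Int) := by
          intro x hx0 hxl
          rw [hlv1] at hxl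
          exact hd2 x hx0 hxl
        have hIH := ih E' deg2 nsum1 val1 aC' queue1 (head+1) (ans + |getI val v|)
          hTor' hfuel' hq1 (by rw [hld2, hlv1]) (by rw [hln1, hlv1])
          (by rw [haC', length_setI, hlaC, hlv1]) hVr' hdeg2' hnsum' hval' hleaf' hsC'
        rw [hIH]
        have hCeq : pvC E aC = |getI aC v| + pvC E' aC' := by
          rw [hE', haC', hpdef]
          exact pvC_exchange E.length E (le_refl _) aC v hE
            (fun x hx => by rw [hlaC]; exact hVr x hx) hsC hvleaf
        rw [hCeq, hval v hvV]
        ring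
      · -- stale entry: skip
        have hstep : pvBLoop (fuel+1) deg nsum val queue head ans
            = pvBLoop fuel deg nsum val queue (head+1) ans := by
          simp only [pvBLoop]
          rw [if_pos hterm, ← hvdef, if_pos (by rw [hdegv]; exact_mod_cast fun hc => hvleaf (by exact_mod_cast hc))]
        rw [hstep]
        apply ih E deg nsum val aC queue (head+1) ans hTor (by omega) hq hldeg hlnsum hlaC hVr hdeg hnsum hval ?_ hsC
        intro x hx
        have hmem := hleaf x hx
        rw [List.drop_eq_getElem_cons hterm] at hmem
        rcases List.mem_cons.1 hmem with h | h
        · exfalso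
          apply hvleaf
          rw [hvdef, List.getD_eq_getElem?_getD, List.getElem?_eq_getElem hterm]
          simp [← h, hx]
        · exact h
    · -- queue exhausted
      have hstop : pvBLoop (fuel+1) deg nsum val queue head ans = ans := by
        simp only [pvBLoop]
        rw [if_neg hterm]
      rw [hstop]
      have hE : E = [] := by
        rcases hTor with h | h
        · by_contra hc
          obtain ⟨w, hw⟩ := exists_leaf h (fun hc' => hc (by rw [hc']))
          have := hleaf w hw
          rw [List.drop_eq_nil_of_le (by omega)] at this
          simp at this
        · exact h
      subst hE
      rw [pvC_nil]
      ring
lemma pvDeg_nil (x : Int) : pvDeg [] x = 0 := by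
  unfold pvDeg
  rw [pvNbrs_nil]
  rfl

theorem solution_spec' : ∀ (a : List Int) (edges : List (List Int)),
    Pre_solution a edges → solution a edges = solution_alt a edges := by
  intro a edges hpre
  rcases hpre with hsum | ⟨hsum, hedges⟩ | ⟨hsum, hshape, hconn, hcard, hvs⟩
  · unfold solution solution_alt
    rw [if_pos hsum, if_pos hsum]
  · subst hedges
    unfold solution solution_alt
    rw [if_neg (show ¬(a.sum ≠ 0) from fun h => h hsum)]
    simp only [List.foldl_nil, List.length_nil]
    have hqnil : (PySem.List.pyRange 0 (a.length : Int) 1).filter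
        (fun v => PySem.List.pyGetD (List.replicate a.length (0:Int)) v 0 == 1) = [] := by
      apply List.filter_eq_nil_iff.2
      intro v hv
      have hv' := PySem.List.mem_pyRange_one.1 hv
      rw [pyGetD_getI hv'.1, getI_replicate]
      simp
    rw [hqnil]
    simp only [pvALoop, pvBLoop]
    rw [if_neg (show ¬(1 < (PySem.Dict.empty : PySem.Dict Int (List Int)).size) by
      simp [PySem.Dict.empty, PySem.Dict.size])]
    rw [if_neg (show ¬((0:Nat) < ([] : List Int).length) by simp)]
    simp only
    rw [if_pos hsum, if_neg (show ¬(a.sum ≠ 0) from fun h => h hsum)]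
  · -- the tree case
    set E := pvEdges edges with hE
    have hElen : E.length = edges.length := by rw [hE]; exact List.length_map ..
    have hself : ∀ e ∈ E, e.1 ≠ e.2 := by
      intro e he
      rw [hE] at he
      rcases List.mem_map.1 he with ⟨f, hf, rfl⟩
      exact (hshape f hf).2.2.2.2.2
    have hrE : ∀ x ∈ pvV E, 0 ≤ x ∧ x < (a.length : Int) := by
      intro x hx
      rcases mem_pvV.1 hx with ⟨e, he, hor⟩
      rw [hE] at he
      rcases List.mem_map.1 he with ⟨f, hf, rfl⟩
      have hsh := hshape f hf
      rcases hor with h | h <;> rw [← h]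
      · exact ⟨hsh.2.1, hsh.2.2.1⟩
      · exact ⟨hsh.2.2.2.1, hsh.2.2.2.2.1⟩
    have hTree : pvTree E := by
      refine ⟨hself, pvConnB_to_conn hconn, ?_⟩
      rw [hElen]
      exact hcard
    -- A side
    have hrep0 : pvRepA (edges.foldl pvABuild PySem.Dict.empty) E := by
      have := build_rep_aux edges PySem.Dict.empty []
        (fun e he => ⟨(hshape e he).1, (hshape e he).2.2.2.2.2⟩) rep_empty
      rwa [List.nil_append] at this
    obtain ⟨afin, hloop, hsumfin⟩ := pvALoop_spec E.length E (le_refl _)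
      (edges.foldl pvABuild PySem.Dict.empty) a a 0 (edges.length + 1) hTree hrep0
      (by omega) hrE rfl (fun _ _ => rfl) hvs
    -- B side
    have hbuild := b_build_aux edges (List.replicate a.length 0, List.replicate a.length 0)
      [] a.length (fun e he => hshape e he)
      (by simp) (by simp)
      (fun x _ _ => by simp only; rw [getI_replicate, pvDeg_nil]; rfl)
      (fun x _ _ => by simp only; rw [getI_replicate, pvNbrs_nil]; rfl)
    rw [List.nil_append] at hbuild
    obtain ⟨hbl1, hbl2, hbdeg, hbnsum⟩ := hbuild
    set dn := edges.foldl pvBStep (List.replicate a.length 0, List.replicate a.length 0) with hdn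
    set queue0 := (PySem.List.pyRange 0 (a.length : Int) 1).filter
      (fun v => PySem.List.pyGetD dn.1 v 0 == 1) with hqueue0
    have hq0 : ∀ x ∈ queue0, 0 ≤ x ∧ x < (a.length : Int) := by
      intro x hx
      rw [hqueue0] at hx
      exact PySem.List.mem_pyRange_one.1 (List.mem_of_mem_filter hx)
    have hleaf0 : ∀ x : Int, pvDeg E x = 1 → x ∈ queue0.drop 0 := by
      intro x hx
      have hxV : x ∈ pvV E := pvDeg_pos_iff.1 (by omega)
      have hb := hrE x hxV
      rw [List.drop_zero, hqueue0]
      apply List.mem_filter.2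
      refine ⟨PySem.List.mem_pyRange_one.2 hb, ?_⟩
      rw [pyGetD_getI hb.1, hbdeg x hb.1 hb.2, hx]
      simp
    have hqlen : queue0.length ≤ a.length := by
      rw [hqueue0]
      calc ((PySem.List.pyRange 0 (a.length : Int) 1).filter _).length
          ≤ (PySem.List.pyRange 0 (a.length : Int) 1).length := List.length_filter_le _ _
        _ = a.length := by rw [PySem.List.length_pyRange_one]; omega
    have hBloop := pvBLoop_spec (a.length + edges.length + 1) E dn.1 dn.2 a a queue0 0 0
      (Or.inl hTree) (by omega) hq0 hbl1 hbl2 rfl hrE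
      (fun x h1 h2 => hbdeg x h1 h2)
      (fun x hx => hbnsum x (hrE x hx).1 (hrE x hx).2)
      (fun _ _ => rfl) hleaf0 hvs
    -- assemble
    unfold solution solution_alt
    rw [if_neg (show ¬(a.sum ≠ 0) from fun h => h hsum),
      if_neg (show ¬(a.sum ≠ 0) from fun h => h hsum)]
    simp only
    rw [hloop, ← hdn, ← hqueue0, hBloop]
    simp only
    rw [hsumfin, if_pos hsum]
-- ===== VERDICT (by name: the statement is the Claim_ definition above) =====
theorem solution_spec : Claim_equal_solution := by
  intro a edges _ hpre
  exact solution_spec' a edges hpre
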